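-- pv_equiv track=rewrite | github.com/MrBrantCode/unitest_baseline | mut_generate/mist_train_taco/taco_7950/solution.py | cut_the_tree
-- ===== SOURCE A (Python) =====
-- def cut_the_tree(data, edges):
--     from collections import deque
--
--     class Node(object):
--         def __init__(self, index, value):
--             self.index = index
--             self.value = value
--             self.children = set()
--             self.parent = None
--             self.value_of_subtree = 0
--
--     N = len(data)
--     node_at_index = [Node(index, value) for (index, value) in enumerate(data)]
--
--     for (a, b) in edges:
--         node_at_index[a - 1].children.add(node_at_index[b - 1])
--         node_at_index[b - 1].children.add(node_at_index[a - 1])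
--
--     root = node_at_index[0]
--     ordered_nodes = [root]
--     q = deque([root])
--
--     while q:
--         n = q.popleft()
--         for c in n.children:
--             c.children.remove(n)
--             c.parent = n
--             q.append(c)
--             ordered_nodes.append(c)
--
--     ordered_nodes.reverse()
--
--     for n in ordered_nodes:
--         n.value_of_subtree = n.value + sum((c.value_of_subtree for c in n.children))
--
--     total = root.value_of_subtree
--     best = N * 2000
--
--     for n in ordered_nodes:
--         for c in n.children:
--             tree_a = c.value_of_subtree
--             tree_b = total - tree_a
--             dif = abs(tree_a - tree_b)
--             if dif < best:
--                 best = dif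
--
--     return best
-- ===== SOURCE B (Python) =====
-- def cut_the_tree(data, edges):
--     # Rootless leaf pruning: repeatedly strip a degree-1 vertex; when the edge to
--     # its last neighbour is removed, the stripped side's accumulated sum s gives a
--     # cut candidate |total - 2*s|.  No rooting, no parent links, no subtree order.
--     n = len(data)
--     adj = [set() for _ in range(n)]
--     for a, b in edges:
--         adj[a - 1].add(b - 1)
--         adj[b - 1].add(a - 1)
--     # membership of node 1's connected component (a plain flood fill, order-free)
--     comp = [False] * n
--     comp[0] = True
--     frontier = [0]
--     while frontier:
--         v = frontier.pop()
--         for u in adj[v]: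
--             if not comp[u]:
--                 comp[u] = True
--                 frontier.append(u)
--     total = sum(data[v] for v in range(n) if comp[v])
--     acc = list(data)
--     best = n * 2000
--     stack = [v for v in range(n) if comp[v] and len(adj[v]) == 1]
--     while stack:
--         v = stack.pop()
--         if len(adj[v]) != 1:
--             continue
--         (u,) = adj[v]
--         adj[v].clear()
--         adj[u].discard(v)
--         best = min(best, abs(total - 2 * acc[v]))
--         acc[u] += acc[v]
--         if len(adj[u]) == 1:
--             stack.append(u)
--     return best
-- ===== Notes on version B (the rewrite author's own statement) =====
-- stated objective: alternative
-- what changed: A roots the tree at node 1 (BFS over Node objects with mutable child sets, a reversed order list, bottom-up subtree sums, nested best loop); B never roots or orders it: a flood fill marks node 1's component (membership only), then a leaf worklist repeatedly strips degree-1 vertices from plain adjacency sets, accumulating each stripped side's sum s and taking min(best,|total-2*s|) per removed edge; …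
-- outside the precondition, e.g. on cut_the_tree([1, 1, 1], [(1, 2), (2, 3), (3, 1)]): A returns 0, B returns 6000; on cut_the_tree([-6, 5], [(-1, 0)]): A returns 11, B returns 1
import Mathlib
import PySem

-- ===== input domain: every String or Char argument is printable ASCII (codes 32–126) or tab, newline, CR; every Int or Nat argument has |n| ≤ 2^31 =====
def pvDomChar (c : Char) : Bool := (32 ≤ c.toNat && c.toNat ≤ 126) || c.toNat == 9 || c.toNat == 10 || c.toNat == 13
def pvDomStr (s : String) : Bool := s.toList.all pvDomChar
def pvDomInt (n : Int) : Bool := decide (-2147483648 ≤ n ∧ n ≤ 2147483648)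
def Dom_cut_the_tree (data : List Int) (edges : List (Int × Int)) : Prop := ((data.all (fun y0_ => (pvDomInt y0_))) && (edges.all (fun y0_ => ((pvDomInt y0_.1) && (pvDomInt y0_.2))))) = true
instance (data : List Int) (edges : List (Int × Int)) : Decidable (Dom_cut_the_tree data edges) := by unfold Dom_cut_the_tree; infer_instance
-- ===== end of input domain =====

-- B replaces A's rooted BFS + bottom-up subtree sums + nested best loop by rootless
-- leaf pruning over a degree/adjacency worklist; objective: alternative algorithm.

-- Python list state indexed by node is modelled as a function Nat → α with pointwise
-- update (all accesses in both programs are at indices 0 ≤ i < len(data)).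
def pvUpd {α : Type} (f : Nat → α) (i : Nat) (x : α) : Nat → α := fun j => if j = i then x else f j

-- normalised index of a 1-based endpoint token: Python's xs[a-1], i.e. (a-1) % n
-- (exact for 1 ≤ a ≤ N, which Pre_ guarantees; Python raises outside -N+1 ≤ a ≤ N)
def pvNorm (N : Nat) (i : Int) : Nat := (PySem.Int.mod (i - 1) (N : Int)).toNat

-- Python set.add on an insertion-ordered set of small nats
def pvSetAdd (l : List Nat) (x : Nat) : List Nat := if x ∈ l then l else l ++ [x]

-- ===== PORT A =====
-- the two children.add calls per edge
def cutChildren (N : Nat) (edges : List (Int × Int)) : Nat → List Nat :=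
  edges.foldl (fun ch ab =>
    let u := pvNorm N ab.1
    let v := pvNorm N ab.2
    let ch' := pvUpd ch u (pvSetAdd (ch u) v)
    pvUpd ch' v (pvSetAdd (ch' v) u)) (fun _ => [])

-- the while-q loop: pop n, and for each c in n.children remove n from c's set, enqueue
-- and record c.  Fuel: each iteration pops one queue element and every element ever
-- enqueued is matched by the removal of one directed adjacency entry, so the Python loop
-- always runs at most 1 + 2*len(edges) iterations; the fuel passed below exceeds that.
def cutBfs : Nat → List Nat → (Nat → List Nat) → List Nat → List Nat × (Nat → List Nat)
  | 0, _, ch, ord => (ord, ch)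
  | _ + 1, [], ch, ord => (ord, ch)
  | fuel + 1, n :: q, ch, ord =>
    let st := (ch n).foldl
      (fun (st : List Nat × (Nat → List Nat) × List Nat) c =>
        (st.1 ++ [c], pvUpd st.2.1 c ((st.2.1 c).erase n), st.2.2 ++ [c]))
      (q, ch, ord)
    cutBfs fuel st.1 st.2.1 st.2.2

def cut_the_tree (data : List Int) (edges : List (Int × Int)) : Int :=
  let N := data.length
  let res := cutBfs (N + 2 * edges.length + 2) [0] (cutChildren N edges) []
  let ch := res.2
  let ordered := (0 :: res.1).reverse        -- ordered_nodes after .reverse()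
  let sub := ordered.foldl
    (fun sub n => pvUpd sub n (data.getD n 0 + (ch n).foldl (fun s c => s + sub c) 0))
    (fun _ => 0)
  let total := sub 0
  ordered.foldl
    (fun best n => (ch n).foldl
      (fun best c =>
        let ta := sub c
        let tb := total - ta
        let dif := |ta - tb|
        if dif < best then dif else best) best)
    ((N : Int) * 2000)

-- ===== PORT B =====
-- adjacency sets: adj[a-1].add(b-1); adj[b-1].add(a-1)
def cutAdjB (N : Nat) (edges : List (Int × Int)) : Nat → List Nat :=
  edges.foldl (fun adj ab =>
    let u := pvNorm N ab.1
    let v := pvNorm N ab.2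
    let adj' := pvUpd adj u (pvSetAdd (adj u) v)
    pvUpd adj' v (pvSetAdd (adj' v) u)) (fun _ => [])

-- the flood fill marking node 1's component (membership only, no order kept).
-- Fuel: each iteration pops one frontier entry and a vertex is pushed at most once
-- (it is marked when pushed), so len(data)+1 iterations always suffice.
def cutFlood (adj : Nat → List Nat) : Nat → List Nat → (Nat → Bool) → (Nat → Bool)
  | 0, _, comp => comp
  | _ + 1, [], comp => comp
  | fuel + 1, v :: fr, comp =>
    let s := (adj v).foldl
      (fun (s : List Nat × (Nat → Bool)) u =>
        if s.2 u then s else (u :: s.1, pvUpd s.2 u true)) (fr, comp)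
    cutFlood adj fuel s.1 s.2

-- the peeling loop; the stack top is the list head (Python pushes/pops at the end).
-- Fuel: every iteration pops once; besides the at most len(data) initial entries, a
-- vertex is pushed only when its degree drops to 1, so 2*len(data)+2 always suffices.
def cutPeel (total : Int) : Nat → List Nat → (Nat → List Nat) → (Nat → Int) → Int → Int
  | 0, _, _, _, best => best
  | _ + 1, [], _, _, best => best
  | fuel + 1, v :: st, adj, acc, best =>
    if (adj v).length ≠ 1 then cutPeel total fuel st adj acc best
    else
      let u := (adj v).headD 0                        -- `(u,) = adj[v]`
      let adj1 := pvUpd adj v []                      -- adj[v].clear()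
      let adj2 := pvUpd adj1 u ((adj1 u).erase v)     -- adj[u].discard(v)
      cutPeel total fuel (if (adj2 u).length = 1 then u :: st else st)
        adj2 (pvUpd acc u (acc u + acc v)) (min best |total - 2 * acc v|)

def cut_the_tree_alt (data : List Int) (edges : List (Int × Int)) : Int :=
  let n := data.length
  let adj := cutAdjB n edges
  let comp := cutFlood adj (n + 1) [0] (pvUpd (fun _ => false) 0 true)
  let total := (List.range n).foldl (fun s v => if comp v then s + data.getD v 0 else s) 0
  cutPeel total (2 * n + 2)
    (((List.range n).filter (fun v => comp v && ((adj v).length == 1))).reverse)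
    adj (fun i => data.getD i 0) ((n : Int) * 2000)

-- ===== PRECONDITION & SPEC =====
-- deduplicated neighbours of v in the normalised undirected graph
def cutNbrs (N : Nat) (edges : List (Int × Int)) (v : Nat) : List Nat :=
  PySem.List.dedup (edges.flatMap (fun ab =>
    let u := pvNorm N ab.1
    let w := pvNorm N ab.2
    (if u = v then [w] else []) ++ (if w = v then [u] else [])))

-- Bellman-Ford-style relaxation rounds for BFS depth from node 0 (sentinel N =
-- unreached), materialised as length-N tables so the predicate is cheap to decide
def cutRelaxT (N : Nat) (nb : List (List Nat)) (d : List Nat) : List Nat :=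
  (List.range N).map (fun v =>
    min (d.getD v N) (((nb.getD v []).foldl (fun m u => min m (d.getD u N)) N) + 1))

def cutDepthAuxT (N : Nat) (nb : List (List Nat)) : Nat → List Nat → List Nat
  | 0, d => d
  | k + 1, d => cutDepthAuxT N nb k (cutRelaxT N nb d)

def cutDepthN (N : Nat) (edges : List (Int × Int)) : Nat → Nat :=
  fun v => (cutDepthAuxT N ((List.range N).map (cutNbrs N edges)) N
    ((List.range N).map (fun v => if v = 0 then 0 else N))).getD v N

-- Pre_ admits the natural domain: the connected component of node 1, read off the
-- computed BFS-depth map, is a tree reached through canonical 1-based endpoints;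
-- other components are unconstrained (neither program looks at them).  Pre_ excludes
-- corners where no single value is specified and both results are defensible: a
-- non-tree component of node 1, where A's value depends on CPython's set-iteration
-- order, and edges reaching the component through non-positive endpoints, which
-- Python's negative indexing maps onto other nodes — see the claim's cites.
def Pre_cut_the_tree (data : List Int) (edges : List (Int × Int)) : Prop :=
  data ≠ [] ∧
  (∀ p ∈ edges, 1 - (data.length : Int) ≤ p.1 ∧ p.1 ≤ (data.length : Int) ∧
      1 - (data.length : Int) ≤ p.2 ∧ p.2 ≤ (data.length : Int)) ∧
  (∀ p ∈ edges,
    (cutDepthN data.length edges (pvNorm data.length p.1) < data.length ∨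
     cutDepthN data.length edges (pvNorm data.length p.2) < data.length) →
    1 ≤ p.1 ∧ 1 ≤ p.2) ∧
  cutDepthN data.length edges 0 = 0 ∧
  (∀ v ∈ List.range data.length, cutDepthN data.length edges v < data.length →
    (∀ u ∈ cutNbrs data.length edges v,
        cutDepthN data.length edges u < data.length ∧
          (cutDepthN data.length edges u + 1 = cutDepthN data.length edges v ∨
           cutDepthN data.length edges u = cutDepthN data.length edges v + 1)) ∧
    (v ≠ 0 → ((cutNbrs data.length edges v).filter
        (fun u => cutDepthN data.length edges u + 1 = cutDepthN data.length edges v)).length = 1) ∧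
    (cutDepthN data.length edges v = 0 → v = 0))

instance (data : List Int) (edges : List (Int × Int)) : Decidable (Pre_cut_the_tree data edges) := by
  unfold Pre_cut_the_tree; infer_instance

def pvWitness_cut_the_tree : List Int × (List (Int × Int)) := ([5, -3, 7, 2, 1, 4, -2, 6], [(1, 2), (2, 3), (2, 4), (4, 5), (1, 6), (6, 7), (3, 8)])

def Spec_cut_the_tree (data : List Int) (edges : List (Int × Int)) (out : Int) : Prop := out = cut_the_tree_alt data edges
instance (data : List Int) (edges : List (Int × Int)) (out : Int) : Decidable (Spec_cut_the_tree data edges out) := by unfold Spec_cut_the_tree; infer_instance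

-- ===== CLAIM (what is proved, stated in full; the proofs are below) =====
def Claim_equal_cut_the_tree : Prop := ∀ (data : List Int) (edges : List (Int × Int)), Dom_cut_the_tree data edges → Pre_cut_the_tree data edges → Spec_cut_the_tree data edges (cut_the_tree data edges)

-- ===== LEMMAS AND PROOFS =====

-- ---------- generic helpers ----------

theorem pvUpd_same {α : Type} (f : Nat → α) (i : Nat) (x : α) : pvUpd f i x i = x := by
  simp [pvUpd]

theorem pvUpd_other {α : Type} (f : Nat → α) (i j : Nat) (x : α) (h : j ≠ i) :
    pvUpd f i x j = f j := by simp [pvUpd, h]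

theorem pvFoldlAddMap (l : List Nat) (g : Nat → Int) (s : Int) :
    l.foldl (fun s c => s + g c) s = s + (l.map g).sum := by
  induction l generalizing s with
  | nil => simp
  | cons x t ih => simp [ih]; ring

theorem pvFoldlFlatMap {α β : Type} (l : List α) (g : α → List β) (f : Int → β → Int) (b : Int) :
    (l.flatMap g).foldl f b = l.foldl (fun b a => (g a).foldl f b) b := by
  induction l generalizing b with
  | nil => rfl
  | cons x t ih => simp [List.flatMap_cons, List.foldl_append, ih]

theorem pvMinIf (b d : Int) : (if d < b then d else b) = min b d := by
  split_ifs with h <;> omega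

theorem pvFoldlCongrMem {α : Type} (l : List α) (f g : Int → α → Int) (b : Int)
    (h : ∀ b x, x ∈ l → f b x = g b x) : l.foldl f b = l.foldl g b := by
  induction l generalizing b with
  | nil => rfl
  | cons x t ih =>
    simp only [List.foldl_cons]
    rw [h b x (by simp), ih _ (fun b y hy => h b y (by simp [hy]))]

-- fold of min only depends on the SET of elements
theorem pvFoldlMin_le (l : List Int) (b : Int) : l.foldl min b ≤ b := by
  induction l generalizing b with
  | nil => exact le_refl b
  | cons x t ih => exact le_trans (ih (min b x)) (min_le_left b x)

theorem pvFoldlMin_le_mem {l : List Int} {x : Int} (hx : x ∈ l) (b : Int) :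
    l.foldl min b ≤ x := by
  induction l generalizing b with
  | nil => simp at hx
  | cons a t ih =>
    rcases List.mem_cons.1 hx with rfl | hx'
    · exact le_trans (pvFoldlMin_le t (min b x)) (min_le_right b x)
    · exact ih hx' (min b a)

theorem pvFoldlMin_cases (l : List Int) (b : Int) : l.foldl min b = b ∨ l.foldl min b ∈ l := by
  induction l generalizing b with
  | nil => exact Or.inl rfl
  | cons a t ih =>
    rcases ih (min b a) with h | h
    · rcases le_total b a with hba | hab
      · exact Or.inl (by rw [List.foldl_cons, h, min_eq_left hba])
      · exact Or.inr (by rw [List.foldl_cons, h, min_eq_right hab]; simp)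
    · exact Or.inr (by simp [h])

theorem pvFoldlMin_setEq {l l' : List Int} (h : ∀ x, x ∈ l ↔ x ∈ l') (b : Int) :
    l.foldl min b = l'.foldl min b := by
  apply le_antisymm
  · rcases pvFoldlMin_cases l' b with h' | h'
    · rw [h']; exact pvFoldlMin_le l b
    · exact pvFoldlMin_le_mem ((h _).2 h') b
  · rcases pvFoldlMin_cases l b with h' | h'
    · rw [h']; exact pvFoldlMin_le l' b
    · exact pvFoldlMin_le_mem ((h _).1 h') b

-- filters by membership in the growing dead list
theorem pvFilterIrrel (l : List Nat) {D : List Nat} {v : Nat} (hv : v ∉ l) :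
    l.filter (fun c => decide (c ∈ v :: D)) = l.filter (fun c => decide (c ∈ D)) := by
  apply List.filter_congr
  intro c hc
  have hcv : c ≠ v := fun h => hv (h ▸ hc)
  simp [List.mem_cons, hcv]

theorem pvSumFilterInsert {l : List Nat} (hnd : l.Nodup) {D : List Nat} {v : Nat}
    (hv : v ∈ l) (hvD : v ∉ D) (S : Nat → Int) :
    ((l.filter (fun c => decide (c ∈ v :: D))).map S).sum
      = S v + ((l.filter (fun c => decide (c ∈ D))).map S).sum := by
  induction l with
  | nil => simp at hv
  | cons a t ih =>
    have hnd' : t.Nodup := (List.nodup_cons.1 hnd).2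
    rcases List.mem_cons.1 hv with rfl | hvt
    · have hvt : v ∉ t := (List.nodup_cons.1 hnd).1
      rw [List.filter_cons, List.filter_cons, pvFilterIrrel t hvt]
      simp [hvD]
    · have hav : a ≠ v := by rintro rfl; exact (List.nodup_cons.1 hnd).1 hvt
      have hiff : (a ∈ v :: D) ↔ (a ∈ D) := by simp [List.mem_cons, hav]
      by_cases haD : a ∈ D
      · rw [List.filter_cons, List.filter_cons, if_pos (by simpa using hiff.2 haD),
          if_pos (by simpa using haD)]
        simp only [List.map_cons, List.sum_cons]
        rw [ih hnd' hvt]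
        ring
      · rw [List.filter_cons, List.filter_cons, if_neg (by simpa using fun h => haD (hiff.1 h)),
          if_neg (by simpa using haD)]
        exact ih hnd' hvt

theorem pvSumFilterAllButOne {l : List Nat} (hnd : l.Nodup) {D : List Nat} {u : Nat}
    (hu : u ∈ l) (huD : u ∉ D) (hall : ∀ c ∈ l, c ∉ D → c = u) (S : Nat → Int) :
    ((l.filter (fun c => decide (c ∈ D))).map S).sum = (l.map S).sum - S u := by
  induction l with
  | nil => simp at hu
  | cons a t ih =>
    have hnd' : t.Nodup := (List.nodup_cons.1 hnd).2
    rcases List.mem_cons.1 hu with rfl | hut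
    · have hut : u ∉ t := (List.nodup_cons.1 hnd).1
      have htall : ∀ c ∈ t, c ∈ D := by
        intro c hc
        by_contra hcD
        exact hut ((hall c (by simp [hc]) hcD) ▸ hc)
      have hflt : t.filter (fun c => decide (c ∈ D)) = t := by
        apply List.filter_eq_self.2
        intro c hc
        simp [htall c hc]
      rw [List.filter_cons, if_neg (by simpa using huD), hflt]
      simp only [List.map_cons, List.sum_cons]
      ring
    · have hau : a ≠ u := by rintro rfl; exact (List.nodup_cons.1 hnd).1 hut
      have haD : a ∈ D := by
        by_contra hcD
        exact hau (hall a (by simp) hcD)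
      rw [List.filter_cons, if_pos (by simpa using haD)]
      simp only [List.map_cons, List.sum_cons]
      rw [ih hnd' hut (fun c hc => hall c (by simp [hc]))]
      ring

theorem pvSumMapSub (l : List Nat) (f g : Nat → Int) :
    (l.map (fun v => f v - g v)).sum = (l.map f).sum - (l.map g).sum := by
  induction l with
  | nil => simp
  | cons a t ih => simp [ih]; ring

theorem pvSumFlatMapMap (l : List Nat) (g : Nat → List Nat) (S : Nat → Int) :
    ((l.flatMap g).map S).sum = (l.map (fun v => ((g v).map S).sum)).sum := by
  induction l with
  | nil => rfl
  | cons a t ih => simp [List.flatMap_cons, ih]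

theorem pvLenOne {l : List Nat} (h : l.length = 1) : l = [l.headD 0] := by
  match l, h with
  | [a], _ => rfl

theorem pvNodupAllEq {l : List Nat} {a : Nat} (hnd : l.Nodup) (ha : a ∈ l)
    (hall : ∀ x ∈ l, x = a) : l.length = 1 := by
  match l, hnd, ha with
  | b :: t, hnd, _ =>
    have hb : b = a := hall b (by simp)
    have ht : t = [] := by
      apply List.eq_nil_iff_forall_not_mem.2
      intro x hx
      have hxa : x = a := hall x (by simp [hx])
      subst hxa
      exact (List.nodup_cons.1 hnd).1 (hb ▸ hx)
    simp [ht]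

-- position helper for the bottom-up pass
theorem pvIdxLtOfParentsFirst {L L1 L2 : List Nat} {x c : Nat} (hnd : L.Nodup)
    (hL : L = L1 ++ x :: L2) (hc : c ∈ L) (hlt : L.idxOf x < L.idxOf c) : c ∈ L2 := by
  subst hL
  have hx1 : x ∉ L1 := by
    intro hx; exact (List.nodup_append.1 hnd).2.2 x hx x (by simp) rfl
  have hxidx : List.idxOf x (L1 ++ x :: L2) = L1.length := by
    rw [List.idxOf_append_of_notMem hx1, List.idxOf_cons_self]; omega
  rcases List.mem_append.1 hc with hc1 | hc2
  · rw [List.idxOf_append_of_mem hc1] at hlt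
    have := List.idxOf_lt_length_of_mem hc1
    omega
  · rcases List.mem_cons.1 hc2 with rfl | h2
    · omega
    · exact h2

-- ---------- basic graph facts ----------

theorem pvNormLt (N : Nat) (i : Int) (hN : 0 < N) : pvNorm N i < N := by
  have hpos : (0 : Int) < (N : Int) := by exact_mod_cast hN
  have h1 := PySem.Int.mod_nonneg (i - 1) hpos
  have h2 := PySem.Int.mod_lt (i - 1) hpos
  unfold pvNorm
  omega

theorem pvMemNbrsIff {N : Nat} {E : List (Int × Int)} {u v : Nat} :
    u ∈ cutNbrs N E v ↔ ∃ ab ∈ E, (pvNorm N ab.1 = v ∧ pvNorm N ab.2 = u) ∨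
      (pvNorm N ab.2 = v ∧ pvNorm N ab.1 = u) := by
  unfold cutNbrs
  rw [PySem.List.mem_dedup, List.mem_flatMap]
  constructor
  · rintro ⟨ab, hab, hm⟩
    refine ⟨ab, hab, ?_⟩
    simp only at hm
    rcases List.mem_append.1 hm with h1 | h1
    · by_cases h2 : pvNorm N ab.1 = v
      · simp [h2] at h1
        exact Or.inl ⟨h2, h1.symm⟩
      · simp [h2] at h1
    · by_cases h3 : pvNorm N ab.2 = v
      · simp [h3] at h1
        exact Or.inr ⟨h3, h1.symm⟩
      · simp [h3] at h1
  · rintro ⟨ab, hab, hm⟩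
    refine ⟨ab, hab, ?_⟩
    rcases hm with ⟨h1, h2⟩ | ⟨h1, h2⟩ <;> subst h1 <;> subst h2 <;> simp

theorem pvMemNbrsLt {N : Nat} {E : List (Int × Int)} {u v : Nat} (hN : 0 < N)
    (h : u ∈ cutNbrs N E v) : u < N := by
  rcases pvMemNbrsIff.1 h with ⟨ab, _, ⟨_, h2⟩ | ⟨_, h2⟩⟩ <;> rw [← h2] <;>
    exact pvNormLt N _ hN

theorem pvNbrsSymm {N : Nat} {E : List (Int × Int)} {u v : Nat}
    (h : u ∈ cutNbrs N E v) : v ∈ cutNbrs N E u := by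
  rcases pvMemNbrsIff.1 h with ⟨ab, hab, ⟨h1, h2⟩ | ⟨h1, h2⟩⟩ <;>
    exact pvMemNbrsIff.2 ⟨ab, hab, by tauto⟩

theorem pvNodupNbrs (N : Nat) (E : List (Int × Int)) (v : Nat) : (cutNbrs N E v).Nodup :=
  PySem.List.nodup_dedup _

-- the context extracted from Pre_
structure CutCtx (N : Nat) (E : List (Int × Int)) : Prop where
  hN : 0 < N
  root : cutDepthN N E 0 = 0
  adjdep : ∀ v, v < N → cutDepthN N E v < N → ∀ u ∈ cutNbrs N E v,
      cutDepthN N E u < N ∧ (cutDepthN N E u + 1 = cutDepthN N E v ∨ cutDepthN N E u = cutDepthN N E v + 1)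
  uniq : ∀ v, v < N → cutDepthN N E v < N → v ≠ 0 →
      ((cutNbrs N E v).filter (fun u => cutDepthN N E u + 1 = cutDepthN N E v)).length = 1
  zeroOnly : ∀ v, v < N → cutDepthN N E v < N → cutDepthN N E v = 0 → v = 0

def cutReach (N : Nat) (E : List (Int × Int)) (v : Nat) : Prop :=
  v < N ∧ cutDepthN N E v < N

def cutParF (N : Nat) (E : List (Int × Int)) (v : Nat) : Nat :=
  ((cutNbrs N E v).filter (fun u => cutDepthN N E u + 1 = cutDepthN N E v)).headD 0

def cutChl (N : Nat) (E : List (Int × Int)) (v : Nat) : List Nat :=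
  (cutNbrs N E v).filter (fun u => cutDepthN N E u = cutDepthN N E v + 1)

theorem pvCtxOfPre {data : List Int} {E : List (Int × Int)}
    (hpre : Pre_cut_the_tree data E) : CutCtx data.length E := by
  obtain ⟨h1, _, _, h3, h4⟩ := hpre
  have hN : 0 < data.length := List.length_pos_of_ne_nil h1
  refine ⟨hN, h3, ?_, ?_, ?_⟩
  · intro v hv hd u hu
    exact (h4 v (List.mem_range.2 hv) hd).1 u hu
  · intro v hv hd h0
    exact (h4 v (List.mem_range.2 hv) hd).2.1 h0
  · intro v hv hd h0
    exact (h4 v (List.mem_range.2 hv) hd).2.2 h0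

theorem pvParSpec {N : Nat} {E : List (Int × Int)} (h : CutCtx N E) {v : Nat}
    (hv : cutReach N E v) (h0 : v ≠ 0) :
    cutParF N E v ∈ cutNbrs N E v ∧ cutDepthN N E (cutParF N E v) + 1 = cutDepthN N E v ∧
      ∀ u ∈ cutNbrs N E v, cutDepthN N E u + 1 = cutDepthN N E v → u = cutParF N E v := by
  have hlen := h.uniq v hv.1 hv.2 h0
  rw [List.length_eq_one_iff] at hlen
  obtain ⟨x, hx⟩ := hlen
  have hxm : x ∈ (cutNbrs N E v).filter (fun u => cutDepthN N E u + 1 = cutDepthN N E v) := by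
    rw [hx]; simp
  rw [List.mem_filter] at hxm
  have hhead : cutParF N E v = x := by unfold cutParF; rw [hx]; rfl
  refine ⟨hhead ▸ hxm.1, hhead ▸ (by simpa using hxm.2), ?_⟩
  intro u hu hdu
  have : u ∈ (cutNbrs N E v).filter (fun u => cutDepthN N E u + 1 = cutDepthN N E v) := by
    rw [List.mem_filter]; exact ⟨hu, by simpa using hdu⟩
  rw [hx] at this
  simpa [hhead] using this

theorem pvParRoot {N : Nat} {E : List (Int × Int)} (h : CutCtx N E) : cutParF N E 0 = 0 := by
  unfold cutParF
  have hnil : (cutNbrs N E 0).filter (fun u => cutDepthN N E u + 1 = cutDepthN N E 0) = [] := by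
    apply List.eq_nil_iff_forall_not_mem.2
    intro x hx
    have := (List.mem_filter.1 hx).2
    rw [h.root] at this
    simp at this
  rw [hnil]
  rfl

theorem pvReachNbr {N : Nat} {E : List (Int × Int)} (h : CutCtx N E) {v u : Nat}
    (hv : cutReach N E v) (hu : u ∈ cutNbrs N E v) : cutReach N E u :=
  ⟨pvMemNbrsLt h.hN hu, (h.adjdep v hv.1 hv.2 u hu).1⟩

theorem pvReachPar {N : Nat} {E : List (Int × Int)} (h : CutCtx N E) {v : Nat}
    (hv : cutReach N E v) (h0 : v ≠ 0) : cutReach N E (cutParF N E v) :=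
  pvReachNbr h hv (pvParSpec h hv h0).1

theorem pvChildIff {N : Nat} {E : List (Int × Int)} (h : CutCtx N E) {v u : Nat}
    (hv : cutReach N E v) :
    u ∈ cutChl N E v ↔ cutReach N E u ∧ u ≠ 0 ∧ cutParF N E u = v := by
  constructor
  · intro hu
    rw [cutChl, List.mem_filter] at hu
    obtain ⟨hmem, hdep⟩ := hu
    have hdep : cutDepthN N E u = cutDepthN N E v + 1 := by simpa using hdep
    have hru : cutReach N E u := pvReachNbr h hv hmem
    have h0 : u ≠ 0 := by
      rintro rfl
      rw [h.root] at hdep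
      omega
    have hvm : v ∈ cutNbrs N E u := pvNbrsSymm hmem
    exact ⟨hru, h0, ((pvParSpec h hru h0).2.2 v hvm (by omega)).symm⟩
  · rintro ⟨hru, h0, hpar⟩
    obtain ⟨hmem, hdep, _⟩ := pvParSpec h hru h0
    rw [hpar] at hmem hdep
    rw [cutChl, List.mem_filter]
    exact ⟨pvNbrsSymm hmem, by simp; omega⟩

theorem pvNbrCases {N : Nat} {E : List (Int × Int)} (h : CutCtx N E) {v u : Nat}
    (hv : cutReach N E v) (hu : u ∈ cutNbrs N E v) :
    (v ≠ 0 ∧ u = cutParF N E v) ∨ u ∈ cutChl N E v := by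
  rcases (h.adjdep v hv.1 hv.2 u hu).2 with hd | hd
  · left
    have hv0 : v ≠ 0 := by
      rintro rfl
      rw [h.root] at hd
      omega
    exact ⟨hv0, (pvParSpec h hv hv0).2.2 u hu hd⟩
  · right
    rw [cutChl, List.mem_filter]
    exact ⟨hu, by simpa using hd⟩

theorem pvReachZero {N : Nat} {E : List (Int × Int)} (h : CutCtx N E) : cutReach N E 0 :=
  ⟨h.hN, by rw [h.root]; exact h.hN⟩

theorem pvChildNeZero {N : Nat} {E : List (Int × Int)} (h : CutCtx N E) {v u : Nat}
    (hv : cutReach N E v) (hu : u ∈ cutChl N E v) : u ≠ 0 :=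
  ((pvChildIff h hv).1 hu).2.1

theorem pvNodupChl (N : Nat) (E : List (Int × Int)) (v : Nat) : (cutChl N E v).Nodup :=
  (pvNodupNbrs N E v).filter _

theorem pvChlSubNbrs {N : Nat} {E : List (Int × Int)} {v c : Nat}
    (hc : c ∈ cutChl N E v) : c ∈ cutNbrs N E v :=
  (List.mem_filter.1 hc).1

theorem pvChlDepth {N : Nat} {E : List (Int × Int)} {v c : Nat}
    (hc : c ∈ cutChl N E v) : cutDepthN N E c = cutDepthN N E v + 1 := by
  have := (List.mem_filter.1 hc).2
  simpa using this

-- a vertex's parent is never among its children (their depths differ by two)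
theorem pvParNotChl {N : Nat} {E : List (Int × Int)} (h : CutCtx N E) {v : Nat}
    (hv : cutReach N E v) : cutParF N E v ∉ cutChl N E v := by
  intro hmem
  by_cases h0 : v = 0
  · subst h0
    exact pvChildNeZero h hv hmem (pvParRoot h)
  · have h1 := (pvParSpec h hv h0).2.1
    have h2 := pvChlDepth hmem
    omega

-- ---------- the mathematical subtree sum ----------

def cutS (N : Nat) (E : List (Int × Int)) (dataF : Nat → Int) : Nat → Nat → Int
  | 0, v => dataF v
  | f + 1, v => dataF v + ((cutChl N E v).map (cutS N E dataF f)).sum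

def cutSval (N : Nat) (E : List (Int × Int)) (dataF : Nat → Int) (v : Nat) : Int :=
  cutS N E dataF N v

theorem pvSStable {N : Nat} {E : List (Int × Int)} (h : CutCtx N E) (dataF : Nat → Int) :
    ∀ f g v, cutReach N E v → N ≤ cutDepthN N E v + f → N ≤ cutDepthN N E v + g →
      cutS N E dataF f v = cutS N E dataF g v := by
  intro f
  induction f with
  | zero =>
    intro g v hv hf _
    exact absurd hf (by have := hv.2; omega)
  | succ f ih =>
    intro g v hv hf hg
    match g with
    | 0 => exact absurd hg (by have := hv.2; omega)
    | g + 1 =>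
      simp only [cutS]
      congr 1
      refine congrArg List.sum (List.map_congr_left ?_)
      intro u hu
      have hru : cutReach N E u := pvReachNbr h hv (List.mem_filter.1 hu).1
      have hdu : cutDepthN N E u = cutDepthN N E v + 1 := by
        have := (List.mem_filter.1 hu).2
        simpa using this
      exact ih g u hru (by omega) (by omega)

theorem pvSRec {N : Nat} {E : List (Int × Int)} (h : CutCtx N E) (dataF : Nat → Int)
    {v : Nat} (hv : cutReach N E v) :
    cutSval N E dataF v = dataF v + ((cutChl N E v).map (cutSval N E dataF)).sum := by
  obtain ⟨N', hN'⟩ : ∃ N', N = N' + 1 := ⟨N - 1, by have := h.hN; omega⟩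
  have key : cutS N E dataF N v = dataF v + ((cutChl N E v).map (cutS N E dataF N')).sum := by
    conv_lhs => rw [hN']
    simp only [cutS]
    rw [← hN']
  unfold cutSval
  rw [key]
  congr 1
  refine congrArg List.sum (List.map_congr_left ?_)
  intro u hu
  have hru : cutReach N E u := pvReachNbr h hv (List.mem_filter.1 hu).1
  have hdu : cutDepthN N E u = cutDepthN N E v + 1 := by
    have := (List.mem_filter.1 hu).2
    simpa using this
  exact pvSStable h dataF N' N u hru (by omega) (by have := hru.2; omega)

-- ---------- admissible elimination orders ----------

structure CutOrder (N : Nat) (E : List (Int × Int)) (L : List Nat) : Prop where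
  nd : L.Nodup
  mem : ∀ v, v ∈ L ↔ cutReach N E v
  pos : ∀ v ∈ L, v ≠ 0 → L.idxOf (cutParF N E v) < L.idxOf v

theorem pvChildPos {N : Nat} {E : List (Int × Int)} {L : List Nat} (h : CutCtx N E)
    (hL : CutOrder N E L) {v c : Nat} (hv : v ∈ L) (hc : c ∈ cutChl N E v) :
    c ∈ L ∧ L.idxOf v < L.idxOf c := by
  have hrv : cutReach N E v := (hL.mem v).1 hv
  obtain ⟨hrc, hc0, hpc⟩ := (pvChildIff h hrv).1 hc
  have hcL : c ∈ L := (hL.mem c).2 hrc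
  have := hL.pos c hcL hc0
  rw [hpc] at this
  exact ⟨hcL, this⟩

-- A-style bottom-up pass: recompute each vertex from its (already final) children
theorem pvFoldACorrect {N : Nat} {E : List (Int × Int)} (h : CutCtx N E)
    (dataF : Nat → Int) {L : List Nat} (hL : CutOrder N E L)
    (chF : Nat → List Nat) (hch : ∀ v ∈ L, (chF v).Perm (cutChl N E v)) :
    ∀ (L2 L1 : List Nat), L = L1 ++ L2 → ∀ sub0,
      (∀ v ∈ L2, (L2.reverse.foldl
          (fun sub n => pvUpd sub n (dataF n + (chF n).foldl (fun s c => s + sub c) 0)) sub0) v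
        = cutSval N E dataF v) ∧
      (∀ v, v ∉ L2 → (L2.reverse.foldl
          (fun sub n => pvUpd sub n (dataF n + (chF n).foldl (fun s c => s + sub c) 0)) sub0) v
        = sub0 v) := by
  intro L2
  induction L2 with
  | nil => exact fun L1 _ sub0 => ⟨fun v hv => absurd hv (by simp), fun v _ => rfl⟩
  | cons x L2' ih =>
    intro L1 hdec sub0
    have hdec' : L = (L1 ++ [x]) ++ L2' := by simp [hdec]
    obtain ⟨ih1, ih2⟩ := ih (L1 ++ [x]) hdec' sub0
    set f := fun (sub : Nat → Int) (n : Nat) =>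
      pvUpd sub n (dataF n + (chF n).foldl (fun s c => s + sub c) 0) with hf
    have hfold : (x :: L2').reverse.foldl f sub0 = f (L2'.reverse.foldl f sub0) x := by
      rw [List.reverse_cons, List.foldl_append]
      rfl
    set r := L2'.reverse.foldl f sub0 with hr
    have hxL : x ∈ L := by rw [hdec]; simp
    have hxnd : (x :: L2').Nodup := (hdec ▸ hL.nd).of_append_right
    have hchild : ∀ c ∈ chF x, c ∈ L2' := by
      intro c hcm
      have hcc : c ∈ cutChl N E x := (hch x hxL).mem_iff.1 hcm
      obtain ⟨hcL, hidx⟩ := pvChildPos h hL hxL hcc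
      exact pvIdxLtOfParentsFirst hL.nd hdec hcL hidx
    have hrx : f r x x = cutSval N E dataF x := by
      have hsum : (chF x).foldl (fun s c => s + r c) 0
          = ((chF x).map (cutSval N E dataF)).sum := by
        rw [pvFoldlAddMap]
        rw [List.map_congr_left (fun c hcm => ih1 c (hchild c hcm))]
        ring
      have hperm : ((chF x).map (cutSval N E dataF)).sum
          = ((cutChl N E x).map (cutSval N E dataF)).sum := ((hch x hxL).map _).sum_eq
      rw [hf]
      simp only [pvUpd_same]
      rw [hsum, hperm, ← pvSRec h dataF ((hL.mem x).1 hxL)]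
    refine ⟨?_, ?_⟩
    · intro v hv
      rw [hfold]
      rcases List.mem_cons.1 hv with rfl | hv2
      · exact hrx
      · have hvx : v ≠ x := by
          rintro rfl
          exact (List.nodup_cons.1 hxnd).1 hv2
        show f r x v = _
        rw [hf]
        simp only []
        rw [pvUpd_other _ _ _ _ hvx]
        exact ih1 v hv2
    · intro v hv
      rw [hfold]
      have hvx : v ≠ x := fun hh => hv (hh ▸ by simp)
      show f r x v = _
      rw [hf]
      simp only []
      rw [pvUpd_other _ _ _ _ hvx]
      exact ih2 v (fun hh => hv (by simp [hh]))

-- ---------- characterisation of A's BFS ----------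

theorem pvDedupSnoc (l : List Nat) (x : Nat) :
    PySem.List.dedup (l ++ [x]) = pvSetAdd (PySem.List.dedup l) x := by
  have h : PySem.List.dedup (l ++ [x]) = (if x ∈ PySem.List.dedup l then PySem.List.dedup l
      else PySem.List.dedup l ++ [x]) := by
    simp only [PySem.List.dedup_eq_ofList, PySem.Set.ofList_eq_foldl, List.foldl_append]
    simp [PySem.Set.add, PySem.Set.contains]
  rw [h]; rfl

theorem pvChildrenEqNbrs (N : Nat) (E : List (Int × Int)) :
    ∀ v, cutChildren N E v = cutNbrs N E v := by
  induction E using List.reverseRecOn with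
  | nil => intro v; rfl
  | append_singleton E ab ih =>
    intro v
    have hstep : cutChildren N (E ++ [ab]) v = (pvUpd
        (pvUpd (cutChildren N E) (pvNorm N ab.1)
          (pvSetAdd (cutChildren N E (pvNorm N ab.1)) (pvNorm N ab.2)))
        (pvNorm N ab.2)
        (pvSetAdd ((pvUpd (cutChildren N E) (pvNorm N ab.1)
          (pvSetAdd (cutChildren N E (pvNorm N ab.1)) (pvNorm N ab.2))) (pvNorm N ab.2))
          (pvNorm N ab.1))) v := by
      unfold cutChildren
      rw [List.foldl_append]
      rfl
    have hnb : cutNbrs N (E ++ [ab]) v = PySem.List.dedup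
        ((E.flatMap (fun ab =>
          (if pvNorm N ab.1 = v then [pvNorm N ab.2] else []) ++
          (if pvNorm N ab.2 = v then [pvNorm N ab.1] else []))) ++
         ((if pvNorm N ab.1 = v then [pvNorm N ab.2] else []) ++
          (if pvNorm N ab.2 = v then [pvNorm N ab.1] else []))) := by
      unfold cutNbrs
      rw [List.flatMap_append]
      simp
    have ihf : ∀ x, cutChildren N E x = PySem.List.dedup (E.flatMap (fun ab1 =>
        (if pvNorm N ab1.1 = x then [pvNorm N ab1.2] else []) ++
        (if pvNorm N ab1.2 = x then [pvNorm N ab1.1] else []))) := fun x => ih x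
    rw [hstep, hnb]
    by_cases h1 : pvNorm N ab.1 = v <;> by_cases h2 : pvNorm N ab.2 = v
    · subst h1
      rw [h2]
      have e : (if pvNorm N ab.1 = pvNorm N ab.1 then [pvNorm N ab.1] else ([] : List Nat))
          = [pvNorm N ab.1] := if_pos rfl
      rw [e, pvUpd_same, pvUpd_same, ← List.append_assoc, pvDedupSnoc, pvDedupSnoc,
        ← ihf (pvNorm N ab.1)]
    · subst h1
      have e1 : (if pvNorm N ab.1 = pvNorm N ab.1 then [pvNorm N ab.2] else ([] : List Nat))
          = [pvNorm N ab.2] := if_pos rfl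
      have e2 : (if pvNorm N ab.2 = pvNorm N ab.1 then [pvNorm N ab.1] else ([] : List Nat))
          = [] := if_neg h2
      rw [e1, e2, List.append_nil,
        pvUpd_other _ _ _ _ (fun hh => h2 hh.symm), pvUpd_same, pvDedupSnoc,
        ← ihf (pvNorm N ab.1)]
    · subst h2
      have e1 : (if pvNorm N ab.1 = pvNorm N ab.2 then [pvNorm N ab.2] else ([] : List Nat))
          = [] := if_neg h1
      have e2 : (if pvNorm N ab.2 = pvNorm N ab.2 then [pvNorm N ab.1] else ([] : List Nat))
          = [pvNorm N ab.1] := if_pos rfl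
      rw [e1, e2, List.nil_append, pvUpd_same,
        pvUpd_other _ _ _ _ (fun hh => h1 hh.symm), pvDedupSnoc, ← ihf (pvNorm N ab.2)]
    · have e1 : (if pvNorm N ab.1 = v then [pvNorm N ab.2] else ([] : List Nat)) = [] := if_neg h1
      have e2 : (if pvNorm N ab.2 = v then [pvNorm N ab.1] else ([] : List Nat)) = [] := if_neg h2
      rw [e1, e2, List.append_nil, List.append_nil,
        pvUpd_other _ _ _ _ (fun hh => h2 hh.symm),
        pvUpd_other _ _ _ _ (fun hh => h1 hh.symm), ← ihf v]

structure BfsInv (N : Nat) (E : List (Int × Int)) (q : List Nat) (ch : Nat → List Nat)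
    (ord : List Nat) : Prop where
  nd : (0 :: ord).Nodup
  rc : ∀ v ∈ (0 :: ord), cutReach N E v
  split : ∃ p, (0 :: ord) = p ++ q
  mono : (0 :: ord).Pairwise (fun a b => cutDepthN N E a ≤ cutDepthN N E b)
  qspan : ∀ a ∈ q, ∀ b ∈ q, cutDepthN N E b ≤ cutDepthN N E a + 1
  pardone : ∀ v ∈ ord, cutParF N E v ∈ (0 :: ord) ∧ cutParF N E v ∉ q
  procchild : ∀ v ∈ (0 :: ord), v ∉ q → ∀ c ∈ cutChl N E v, c ∈ (0 :: ord)
  chstate : ∀ v, ch v = if v ∈ ord then (cutNbrs N E v).erase (cutParF N E v) else cutNbrs N E v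

theorem pvBfsFold (n : Nat) (cs : List Nat) :
    cs.Nodup → ∀ (q0 : List Nat) (ch0 : Nat → List Nat) (ord0 : List Nat),
      (cs.foldl (fun (st : List Nat × (Nat → List Nat) × List Nat) c =>
        (st.1 ++ [c], pvUpd st.2.1 c ((st.2.1 c).erase n), st.2.2 ++ [c])) (q0, ch0, ord0)).1
          = q0 ++ cs ∧
      (cs.foldl (fun (st : List Nat × (Nat → List Nat) × List Nat) c =>
        (st.1 ++ [c], pvUpd st.2.1 c ((st.2.1 c).erase n), st.2.2 ++ [c])) (q0, ch0, ord0)).2.2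
          = ord0 ++ cs ∧
      ∀ v, (cs.foldl (fun (st : List Nat × (Nat → List Nat) × List Nat) c =>
        (st.1 ++ [c], pvUpd st.2.1 c ((st.2.1 c).erase n), st.2.2 ++ [c])) (q0, ch0, ord0)).2.1 v
          = if v ∈ cs then (ch0 v).erase n else ch0 v := by
  induction cs with
  | nil => intro _ q0 ch0 ord0; exact ⟨by simp, by simp, fun v => by simp⟩
  | cons c cs' ih =>
    intro hnd q0 ch0 ord0
    have hnd' : cs'.Nodup := (List.nodup_cons.1 hnd).2
    have hcn : c ∉ cs' := (List.nodup_cons.1 hnd).1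
    obtain ⟨ih1, ih2, ih3⟩ := ih hnd' (q0 ++ [c])
      (pvUpd ch0 c ((ch0 c).erase n)) (ord0 ++ [c])
    simp only [List.foldl_cons]
    refine ⟨by rw [ih1]; simp, by rw [ih2]; simp, ?_⟩
    intro v
    rw [ih3 v]
    by_cases hv : v = c
    · subst hv
      simp [hcn, pvUpd_same]
    · rw [pvUpd_other _ _ _ _ hv]
      by_cases hv' : v ∈ cs' <;> simp [hv', hv]

theorem pvNodupBound {N : Nat} {L : List Nat} (hnd : L.Nodup) (hlt : ∀ v ∈ L, v < N) :
    L.length ≤ N := by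
  have h1 : L.toFinset.card = L.length := List.toFinset_card_of_nodup hnd
  have h2 : L.toFinset ⊆ Finset.range N := by
    intro v hv
    rw [List.mem_toFinset] at hv
    exact Finset.mem_range.2 (hlt v hv)
  have := Finset.card_le_card h2
  rw [Finset.card_range] at this
  omega

theorem pvBfsMain {N : Nat} {E : List (Int × Int)} (h : CutCtx N E) :
    ∀ fuel q ch ord, BfsInv N E q ch ord →
      q.length + (N - (0 :: ord).length) < fuel →
      BfsInv N E [] (cutBfs fuel q ch ord).2 (cutBfs fuel q ch ord).1 := by
  intro fuel
  induction fuel with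
  | zero => intro q ch ord _ hm; exact absurd hm (by omega)
  | succ fuel ih =>
    intro q ch ord hInv hm
    match q with
    | [] => exact hInv
    | n :: q' =>
      obtain ⟨p, hsplit⟩ := hInv.split
      have hnL : n ∈ (0 :: ord) := by rw [hsplit]; simp
      have hrn := hInv.rc n hnL
      have hndL := hInv.nd
      have hnq' : n ∉ q' := by
        have h2 : (n :: q').Nodup := by
          rw [hsplit] at hndL
          exact hndL.of_append_right
        exact (List.nodup_cons.1 h2).1
      have h0ord : (0 : Nat) ∉ ord := (List.nodup_cons.1 hndL).1
      have hcs : ∀ c, c ∈ ch n ↔ c ∈ cutChl N E n := by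
        intro c
        rw [hInv.chstate n]
        by_cases hno : n ∈ ord
        · have hn0 : n ≠ 0 := fun hh => h0ord (hh ▸ hno)
          rw [if_pos hno, (pvNodupNbrs N E n).mem_erase_iff]
          constructor
          · rintro ⟨hne, hmem⟩
            rcases pvNbrCases h hrn hmem with ⟨_, hpc⟩ | hchl
            · exact absurd hpc hne
            · exact hchl
          · intro hchl
            have hmem := (List.mem_filter.1 hchl).1
            have hdc : cutDepthN N E c = cutDepthN N E n + 1 := by
              simpa using (List.mem_filter.1 hchl).2
            have hdp := (pvParSpec h hrn hn0).2.1
            refine ⟨fun hh => ?_, hmem⟩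
            rw [hh] at hdc
            omega
        · have hn0 : n = 0 := by
            rcases List.mem_cons.1 hnL with hh | hh
            · exact hh
            · exact absurd hh hno
          subst hn0
          rw [if_neg hno]
          constructor
          · intro hmem
            rcases pvNbrCases h hrn hmem with ⟨hne, _⟩ | hchl
            · exact absurd rfl hne
            · exact hchl
          · exact fun hchl => (List.mem_filter.1 hchl).1
      have hcsnd : (ch n).Nodup := by
        rw [hInv.chstate n]
        split
        · exact (pvNodupNbrs N E n).erase _
        · exact pvNodupNbrs N E n
      have hrc_cs : ∀ c ∈ ch n, cutReach N E c := fun c hc =>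
        pvReachNbr h hrn (List.mem_filter.1 ((hcs c).1 hc)).1
      have hdep_cs : ∀ c ∈ ch n, cutDepthN N E c = cutDepthN N E n + 1 := fun c hc => by
        simpa using (List.mem_filter.1 ((hcs c).1 hc)).2
      have hpar_cs : ∀ c ∈ ch n, cutParF N E c = n := fun c hc =>
        ((pvChildIff h hrn).1 ((hcs c).1 hc)).2.2
      have hne0_cs : ∀ c ∈ ch n, c ≠ 0 := fun c hc =>
        pvChildNeZero h hrn ((hcs c).1 hc)
      have hcsnotL : ∀ c ∈ ch n, c ∉ (0 :: ord) := by
        intro c hc hcL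
        rcases List.mem_cons.1 hcL with hh | hh
        · exact hne0_cs c hc hh
        · have := (hInv.pardone c hh).2
          rw [hpar_cs c hc] at this
          exact this (by simp)
      obtain ⟨hq1, hq2, hq3⟩ := pvBfsFold n (ch n) hcsnd q' ch ord
      have hstep : cutBfs (fuel + 1) (n :: q') ch ord
          = cutBfs fuel (q' ++ ch n)
              (fun v => if v ∈ ch n then (ch v).erase n else ch v) (ord ++ ch n) := by
        show cutBfs fuel
          ((ch n).foldl (fun (st : List Nat × (Nat → List Nat) × List Nat) c =>
            (st.1 ++ [c], pvUpd st.2.1 c ((st.2.1 c).erase n), st.2.2 ++ [c])) (q', ch, ord)).1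
          ((ch n).foldl _ (q', ch, ord)).2.1 ((ch n).foldl _ (q', ch, ord)).2.2 = _
        rw [hq1, hq2, funext hq3]
      rw [hstep]
      have hmono' := hInv.mono
      have hLq' : ∀ a ∈ q', cutDepthN N E n ≤ cutDepthN N E a := by
        intro a ha
        have h2 : (n :: q').Pairwise (fun a b => cutDepthN N E a ≤ cutDepthN N E b) := by
          rw [hsplit] at hmono'
          exact hmono'.sublist (List.sublist_append_right p _)
        exact List.rel_of_pairwise_cons h2 ha
      have hPa : ∀ a ∈ p, cutDepthN N E a ≤ cutDepthN N E n := by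
        intro a ha
        rw [hsplit] at hmono'
        exact (List.pairwise_append.1 hmono').2.2 a ha n (by simp)
      have hInv' : BfsInv N E (q' ++ ch n)
          (fun v => if v ∈ ch n then (ch v).erase n else ch v) (ord ++ ch n) := by
        have hL' : (0 :: (ord ++ ch n)) = (0 :: ord) ++ ch n := by simp
        refine ⟨?_, ?_, ?_, ?_, ?_, ?_, ?_, ?_⟩
        · rw [hL', List.nodup_append]
          exact ⟨hndL, hcsnd, fun a ha b hb hab => hcsnotL b hb (hab ▸ ha)⟩
        · intro v hv
          rw [hL'] at hv
          rcases List.mem_append.1 hv with hv | hv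
          · exact hInv.rc v hv
          · exact hrc_cs v hv
        · exact ⟨p ++ [n], by rw [hL', hsplit]; simp⟩
        · rw [hL', List.pairwise_append]
          refine ⟨hInv.mono, ?_, ?_⟩
          · rw [List.pairwise_iff_getElem]
            intro i j hi hj hij
            rw [hdep_cs _ (List.getElem_mem hi), hdep_cs _ (List.getElem_mem hj)]
          · intro a ha b hb
            rw [hdep_cs b hb]
            rw [hsplit] at ha
            rcases List.mem_append.1 ha with ha | ha
            · have := hPa a ha
              omega
            · rcases List.mem_cons.1 ha with rfl | ha
              · omega
              · have := hLq' a ha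
                have hq := hInv.qspan n (by simp) a (by simp [ha])
                omega
        · intro a ha b hb
          have hda : cutDepthN N E n ≤ cutDepthN N E a := by
            rcases List.mem_append.1 ha with ha | ha
            · exact hLq' a ha
            · rw [hdep_cs a ha]; omega
          rcases List.mem_append.1 hb with hb | hb
          · have := hInv.qspan n (by simp) b (by simp [hb])
            omega
          · rw [hdep_cs b hb]
            omega
        · intro v hv
          rcases List.mem_append.1 hv with hv | hv
          · obtain ⟨h1, h2⟩ := hInv.pardone v hv
            refine ⟨by rw [hL']; exact List.mem_append_left _ h1, ?_⟩
            intro hmem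
            rcases List.mem_append.1 hmem with hh | hh
            · exact h2 (by simp [hh])
            · exact hcsnotL _ hh h1
          · rw [hpar_cs v hv]
            refine ⟨by rcases List.mem_cons.1 hnL with hh | hh <;> simp [hh], ?_⟩
            intro hmem
            rcases List.mem_append.1 hmem with hh | hh
            · exact hnq' hh
            · exact hcsnotL n hh hnL
        · intro v hv hvq c hc
          rw [hL'] at hv ⊢
          rcases List.mem_append.1 hv with hv | hv
          · by_cases hvn : v = n
            · subst hvn
              exact List.mem_append_right _ ((hcs c).2 hc)
            · have hvq' : v ∉ n :: q' := by
                intro hh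
                rcases List.mem_cons.1 hh with hh | hh
                · exact hvn hh
                · exact hvq (List.mem_append_left _ hh)
              exact List.mem_append_left _ (hInv.procchild v hv hvq' c hc)
          · exact absurd (List.mem_append_right q' hv) hvq
        · intro v
          by_cases hvcs : v ∈ ch n
          · rw [if_pos hvcs, if_pos (List.mem_append_right _ hvcs)]
            have hvo : v ∉ ord := fun hh => hcsnotL v hvcs (by simp [hh])
            rw [hInv.chstate v, if_neg hvo, hpar_cs v hvcs]
          · rw [if_neg hvcs]
            by_cases hvo : v ∈ ord
            · rw [if_pos (List.mem_append_left _ hvo), hInv.chstate v, if_pos hvo]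
            · rw [if_neg (fun hh => (List.mem_append.1 hh).elim hvo hvcs), hInv.chstate v,
                if_neg hvo]
      apply ih _ _ _ hInv'
      have hbound : (0 :: (ord ++ ch n)).length ≤ N := by
        apply pvNodupBound hInv'.nd
        intro v hv
        exact (hInv'.rc v hv).1
      simp only [List.length_append, List.length_cons] at hbound hm ⊢
      omega

theorem pvPosOfMono {N : Nat} {E : List (Int × Int)} {L : List Nat} (hnd : L.Nodup)
    (hmono : L.Pairwise (fun a b => cutDepthN N E a ≤ cutDepthN N E b)) {a b : Nat}
    (ha : a ∈ L) (hb : b ∈ L) (hd : cutDepthN N E a < cutDepthN N E b) :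
    L.idxOf a < L.idxOf b := by
  rcases lt_trichotomy (L.idxOf a) (L.idxOf b) with hlt | heq | hgt
  · exact hlt
  · exfalso
    have ha' := List.idxOf_lt_length_of_mem ha
    have : a = b := by
      have e1 : L[L.idxOf a] = a := List.getElem_idxOf ha'
      have e2 : L[L.idxOf b] = b := List.getElem_idxOf (heq ▸ ha')
      rw [← e1, ← e2]
      congr 1
    subst this
    omega
  · exfalso
    have hp := List.pairwise_iff_getElem.1 hmono (L.idxOf b) (L.idxOf a)
      (List.idxOf_lt_length_of_mem hb) (List.idxOf_lt_length_of_mem ha) hgt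
    rw [List.getElem_idxOf (List.idxOf_lt_length_of_mem ha),
      List.getElem_idxOf (List.idxOf_lt_length_of_mem hb)] at hp
    omega

theorem pvComplete {N : Nat} {E : List (Int × Int)} (h : CutCtx N E) {L : List Nat}
    (h0 : (0 : Nat) ∈ L)
    (hcl : ∀ v ∈ L, ∀ c ∈ cutChl N E v, c ∈ L) :
    ∀ v, cutReach N E v → v ∈ L := by
  have key : ∀ d v, cutReach N E v → cutDepthN N E v = d → v ∈ L := by
    intro d
    induction d using Nat.strong_induction_on with
    | _ d ih =>
      intro v hv hd
      by_cases hv0 : v = 0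
      · subst hv0; exact h0
      · have hrp := pvReachPar h hv hv0
        have hdp := (pvParSpec h hv hv0).2.1
        have hmem : cutParF N E v ∈ L := ih (cutDepthN N E (cutParF N E v)) (by omega) _ hrp rfl
        refine hcl _ hmem v ?_
        exact (pvChildIff h hrp).2 ⟨hv, hv0, rfl⟩
  exact fun v hv => key (cutDepthN N E v) v hv rfl

theorem pvBfsFinal {N : Nat} {E : List (Int × Int)} (h : CutCtx N E) :
    CutOrder N E (0 :: (cutBfs (N + 2 * E.length + 2) [0] (cutChildren N E) []).1) ∧
      (∀ v ∈ (0 :: (cutBfs (N + 2 * E.length + 2) [0] (cutChildren N E) []).1),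
        ((cutBfs (N + 2 * E.length + 2) [0] (cutChildren N E) []).2 v).Perm (cutChl N E v)) := by
  have hInv0 : BfsInv N E [0] (cutChildren N E) [] := by
    refine ⟨?_, ?_, ?_, ?_, ?_, ?_, ?_, ?_⟩
    · simp
    · intro v hv
      have : v = 0 := by simpa using hv
      subst this
      exact pvReachZero h
    · exact ⟨[], rfl⟩
    · simp
    · intro a ha b hb
      have ha' : a = 0 := by simpa using ha
      have hb' : b = 0 := by simpa using hb
      subst ha'; subst hb'
      omega
    · intro v hv
      simp at hv
    · intro v hv hvq
      have : v = 0 := by simpa using hv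
      subst this
      exact absurd (by simp) hvq
    · intro v
      simp [pvChildrenEqNbrs N E v]
  have hfin := pvBfsMain h (N + 2 * E.length + 2) [0] (cutChildren N E) [] hInv0
    (by have := h.hN; simp; omega)
  set r := cutBfs (N + 2 * E.length + 2) [0] (cutChildren N E) [] with hr
  have hmemL : ∀ v, v ∈ (0 :: r.1) ↔ cutReach N E v := by
    intro v
    constructor
    · exact hfin.rc v
    · exact pvComplete h (by simp) (fun w hw c hc => hfin.procchild w hw (by simp) c hc) v
  have hord : CutOrder N E (0 :: r.1) := by
    refine ⟨hfin.nd, hmemL, ?_⟩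
    intro v hv hv0
    have hrv := hfin.rc v hv
    have hrp := pvReachPar h hrv hv0
    have hdp := (pvParSpec h hrv hv0).2.1
    exact pvPosOfMono hfin.nd hfin.mono ((hmemL _).2 hrp) hv (by omega)
  refine ⟨hord, ?_⟩
  intro v hv
  have hrv := hfin.rc v hv
  have hchst := hfin.chstate v
  have hndchl : (cutChl N E v).Nodup := pvNodupChl N E v
  by_cases hvo : v ∈ r.1
  · have hv0 : v ≠ 0 := fun hh => (List.nodup_cons.1 hfin.nd).1 (hh ▸ hvo)
    rw [hchst, if_pos hvo]
    apply List.perm_of_nodup_nodup_toFinset_eq ((pvNodupNbrs N E v).erase _) hndchl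
    ext c
    simp only [List.mem_toFinset]
    rw [(pvNodupNbrs N E v).mem_erase_iff]
    constructor
    · rintro ⟨hne, hmem⟩
      rcases pvNbrCases h hrv hmem with ⟨_, hpc⟩ | hchl
      · exact absurd hpc hne
      · exact hchl
    · intro hchl
      have hmem := (List.mem_filter.1 hchl).1
      have hdc : cutDepthN N E c = cutDepthN N E v + 1 := by
        simpa using (List.mem_filter.1 hchl).2
      have hdpp := (pvParSpec h hrv hv0).2.1
      exact ⟨fun hh => by rw [hh] at hdc; omega, hmem⟩
  · have hv0 : v = 0 := by
      rcases List.mem_cons.1 hv with hh | hh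
      · exact hh
      · exact absurd hh hvo
    subst hv0
    rw [hchst, if_neg hvo]
    apply List.perm_of_nodup_nodup_toFinset_eq (pvNodupNbrs N E 0) hndchl
    ext c
    simp only [List.mem_toFinset]
    constructor
    · intro hmem
      rcases pvNbrCases h hrv hmem with ⟨hne, _⟩ | hchl
      · exact absurd rfl hne
      · exact hchl
    · exact fun hchl => (List.mem_filter.1 hchl).1

-- the flattened child list is duplicate-free and enumerates the non-roots
theorem pvFlatNodup {N : Nat} {E : List (Int × Int)} (h : CutCtx N E)
    {L : List Nat} (hnd : L.Nodup) (hrc : ∀ v ∈ L, cutReach N E v)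
    (chF : Nat → List Nat) (hch : ∀ v ∈ L, (chF v).Perm (cutChl N E v)) :
    (L.flatMap chF).Nodup := by
  induction L with
  | nil => simp
  | cons x t ih =>
    rw [List.flatMap_cons, List.nodup_append]
    have hxt : x ∉ t := (List.nodup_cons.1 hnd).1
    have hchx := hch x (by simp)
    refine ⟨hchx.nodup_iff.2 (pvNodupChl N E x), ?_, ?_⟩
    · exact ih (List.nodup_cons.1 hnd).2 (fun v hv => hrc v (by simp [hv]))
        (fun v hv => hch v (by simp [hv]))
    · intro a ha b hb hab
      subst hab
      rw [List.mem_flatMap] at hb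
      obtain ⟨y, hy, hby⟩ := hb
      have hax : a ∈ cutChl N E x := hchx.mem_iff.1 ha
      have hay : a ∈ cutChl N E y := (hch y (by simp [hy])).mem_iff.1 hby
      have hrx : cutReach N E x := hrc x (by simp)
      have hry : cutReach N E y := hrc y (by simp [hy])
      have e1 := ((pvChildIff h hrx).1 hax).2.2
      have e2 := ((pvChildIff h hry).1 hay).2.2
      exact hxt (by rw [← e1, e2]; exact hy)

theorem pvFlatPerm {N : Nat} {E : List (Int × Int)} (h : CutCtx N E)
    {L L' : List Nat} (hL : CutOrder N E L) (hL' : CutOrder N E L')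
    (chF : Nat → List Nat) (hch : ∀ v ∈ L, (chF v).Perm (cutChl N E v)) :
    (L.flatMap chF).Perm (L'.filter (fun u => decide (u ≠ 0))) := by
  apply List.perm_of_nodup_nodup_toFinset_eq
    (pvFlatNodup h hL.nd (fun v hv => (hL.mem v).1 hv) chF hch)
    (hL'.nd.filter _)
  ext c
  simp only [List.mem_toFinset, List.mem_flatMap, List.mem_filter, decide_eq_true_eq]
  constructor
  · rintro ⟨v, hv, hcv⟩
    have hrv := (hL.mem v).1 hv
    have hcc : c ∈ cutChl N E v := (hch v hv).mem_iff.1 hcv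
    obtain ⟨hrc, hc0, _⟩ := (pvChildIff h hrv).1 hcc
    exact ⟨(hL'.mem c).2 hrc, hc0⟩
  · rintro ⟨hcL', hc0⟩
    have hrc := (hL'.mem c).1 hcL'
    have hrp := pvReachPar h hrc hc0
    refine ⟨cutParF N E c, (hL.mem _).2 hrp, ?_⟩
    exact (hch _ ((hL.mem _).2 hrp)).mem_iff.2 ((pvChildIff h hrp).2 ⟨hrc, hc0, rfl⟩)

-- total data = subtree sum of the root (telescoping over an admissible order)
theorem pvSumRoot {N : Nat} {E : List (Int × Int)} (h : CutCtx N E) (dataF : Nat → Int)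
    {L : List Nat} (hL : CutOrder N E L) :
    (L.map dataF).sum = cutSval N E dataF 0 := by
  have h0L : (0 : Nat) ∈ L := (hL.mem 0).2 (pvReachZero h)
  have hstep : (L.map dataF).sum
      = (L.map (fun v => cutSval N E dataF v - ((cutChl N E v).map (cutSval N E dataF)).sum)).sum := by
    congr 1
    apply List.map_congr_left
    intro v hv
    have := pvSRec h dataF ((hL.mem v).1 hv)
    omega
  rw [hstep, pvSumMapSub]
  have hflat : ((L.flatMap (cutChl N E)).map (cutSval N E dataF)).sum
      = (L.map (fun v => ((cutChl N E v).map (cutSval N E dataF)).sum)).sum :=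
    pvSumFlatMapMap L (cutChl N E) (cutSval N E dataF)
  rw [← hflat]
  have hperm : (L.flatMap (cutChl N E)).Perm (L.filter (fun u => decide (u ≠ 0))) :=
    pvFlatPerm h hL hL (cutChl N E) (fun v _ => List.Perm.refl _)
  rw [(hperm.map (cutSval N E dataF)).sum_eq]
  have hL0 : L.Perm (0 :: L.filter (fun u => decide (u ≠ 0))) := by
    have he : L.erase 0 = L.filter (fun u => decide (u ≠ 0)) := by
      rw [hL.nd.erase_eq_filter]
      apply List.filter_congr
      intro c _
      by_cases hc : c = 0 <;> simp [hc, bne]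
    rw [← he]
    exact List.perm_cons_erase h0L
  have hsum0 := (hL0.map (cutSval N E dataF)).sum_eq
  simp only [List.map_cons, List.sum_cons] at hsum0
  omega

-- ---------- B: the flood fill marking node 1's component ----------

theorem pvFloodFold (l : List Nat) :
    ∀ (fr : List Nat) (vis : Nat → Bool),
      ∃ ns : List Nat,
        (l.foldl (fun (s : List Nat × (Nat → Bool)) u =>
          if s.2 u then s else (u :: s.1, pvUpd s.2 u true)) (fr, vis)).1 = ns ++ fr ∧
        ns.Nodup ∧
        (∀ u ∈ ns, u ∈ l ∧ vis u = false) ∧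
        (∀ u, (l.foldl (fun (s : List Nat × (Nat → Bool)) u =>
          if s.2 u then s else (u :: s.1, pvUpd s.2 u true)) (fr, vis)).2 u
            = (vis u || decide (u ∈ ns))) ∧
        (∀ u ∈ l, (l.foldl (fun (s : List Nat × (Nat → Bool)) u =>
          if s.2 u then s else (u :: s.1, pvUpd s.2 u true)) (fr, vis)).2 u = true) := by
  induction l with
  | nil =>
    intro fr vis
    exact ⟨[], rfl, List.nodup_nil, by simp, fun u => by simp, by simp⟩
  | cons c l' ih =>
    intro fr vis
    by_cases hc : vis c = true
    · simp only [List.foldl_cons, if_pos hc]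
      obtain ⟨ns, h1, h2, h3, h4, h5⟩ := ih fr vis
      refine ⟨ns, h1, h2, fun u hu => ⟨by simp [(h3 u hu).1], (h3 u hu).2⟩, h4, ?_⟩
      intro u hu
      rcases List.mem_cons.1 hu with rfl | hu
      · rw [h4 u, hc]; simp
      · exact h5 u hu
    · simp only [List.foldl_cons, if_neg hc]
      obtain ⟨ns', h1, h2, h3, h4, h5⟩ := ih (c :: fr) (pvUpd vis c true)
      have hcns' : c ∉ ns' := by
        intro hcc
        have := (h3 c hcc).2
        rw [pvUpd_same] at this
        exact absurd this (by simp)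
      refine ⟨ns' ++ [c], by rw [h1]; simp, ?_, ?_, ?_, ?_⟩
      · rw [List.nodup_append]
        refine ⟨h2, List.nodup_singleton c, fun a ha b hb hab => ?_⟩
        have hb' : b = c := by simpa using hb
        subst hb'
        exact hcns' (hab ▸ ha)
      · intro u hu
        rcases List.mem_append.1 hu with hu | hu
        · obtain ⟨hul, huv⟩ := h3 u hu
          have huc : u ≠ c := fun hh => hcns' (hh ▸ hu)
          rw [pvUpd_other _ _ _ _ huc] at huv
          exact ⟨by simp [hul], huv⟩
        · have : u = c := by simpa using hu
          subst this
          exact ⟨by simp, by simpa using hc⟩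
      · intro u
        rw [h4 u]
        by_cases huc : u = c
        · subst huc
          rw [pvUpd_same]
          simp
        · rw [pvUpd_other _ _ _ _ huc]
          have : (u ∈ ns' ++ [c]) ↔ u ∈ ns' := by simp [huc]
          simp [this]
      · intro u hu
        rcases List.mem_cons.1 hu with rfl | hu
        · rw [h4 u, pvUpd_same]
          simp
        · exact h5 u hu

structure FloodInv (N : Nat) (E : List (Int × Int)) (fr : List Nat) (vis : Nat → Bool)
    (M : List Nat) : Prop where
  ndM : M.Nodup
  visiff : ∀ v, vis v = true ↔ v ∈ M
  rcM : ∀ v ∈ M, cutReach N E v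
  zeroM : (0 : Nat) ∈ M
  frM : ∀ v ∈ fr, v ∈ M
  closed : ∀ v ∈ M, v ∉ fr → ∀ u ∈ cutNbrs N E v, vis u = true

theorem pvFloodMain {N : Nat} {E : List (Int × Int)} (h : CutCtx N E)
    (adj : Nat → List Nat) (hadj : ∀ v, adj v = cutNbrs N E v) :
    ∀ fuel fr vis M, FloodInv N E fr vis M →
      fr.length + (N - M.length) < fuel →
      ∃ M', FloodInv N E [] (cutFlood adj fuel fr vis) M' := by
  intro fuel
  induction fuel with
  | zero => intro fr vis M _ hm; exact absurd hm (by omega)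
  | succ fuel ih =>
    intro fr vis M hInv hm
    match fr with
    | [] => exact ⟨M, hInv⟩
    | v :: fr =>
      obtain ⟨ns, h1, h2, h3, h4, h5⟩ := pvFloodFold (adj v) fr vis
      have hstep : cutFlood adj (fuel + 1) (v :: fr) vis
          = cutFlood adj fuel
              ((adj v).foldl (fun (s : List Nat × (Nat → Bool)) u =>
                if s.2 u then s else (u :: s.1, pvUpd s.2 u true)) (fr, vis)).1
              ((adj v).foldl (fun (s : List Nat × (Nat → Bool)) u =>
                if s.2 u then s else (u :: s.1, pvUpd s.2 u true)) (fr, vis)).2 := rfl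
      rw [hstep, h1]
      have hvM : v ∈ M := hInv.frM v (by simp)
      have hrv : cutReach N E v := hInv.rcM v hvM
      have hnsM : ∀ u ∈ ns, u ∉ M := by
        intro u hu hmem
        have := (h3 u hu).2
        rw [(hInv.visiff u).2 hmem] at this
        exact absurd this (by simp)
      have hnsrc : ∀ u ∈ ns, cutReach N E u := by
        intro u hu
        have : u ∈ cutNbrs N E v := by
          have := (h3 u hu).1
          rwa [hadj v] at this
        exact pvReachNbr h hrv this
      have hInv' : FloodInv N E (ns ++ fr)
          ((adj v).foldl (fun (s : List Nat × (Nat → Bool)) u =>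
            if s.2 u then s else (u :: s.1, pvUpd s.2 u true)) (fr, vis)).2 (ns ++ M) := by
        refine ⟨?_, ?_, ?_, ?_, ?_, ?_⟩
        · rw [List.nodup_append]
          exact ⟨h2, hInv.ndM, fun a ha b hb hab => hnsM a ha (hab ▸ hb)⟩
        · intro w
          rw [h4 w]
          constructor
          · intro hw
            rcases Bool.or_eq_true_iff.1 hw with hw | hw
            · exact List.mem_append_right _ ((hInv.visiff w).1 hw)
            · exact List.mem_append_left _ (of_decide_eq_true hw)
          · intro hw
            rcases List.mem_append.1 hw with hw | hw
            · simp [hw]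
            · simp [(hInv.visiff w).2 hw]
        · intro w hw
          rcases List.mem_append.1 hw with hw | hw
          · exact hnsrc w hw
          · exact hInv.rcM w hw
        · exact List.mem_append_right _ hInv.zeroM
        · intro w hw
          rcases List.mem_append.1 hw with hw | hw
          · exact List.mem_append_left _ hw
          · exact List.mem_append_right _ (hInv.frM w (by simp [hw]))
        · intro w hw hwfr u hu
          rcases List.mem_append.1 hw with hw | hw
          · exact absurd (List.mem_append_left _ hw) hwfr
          · by_cases hwv : w = v
            · subst hwv
              exact h5 u (by rw [hadj w]; exact hu)
            · have hwfr' : w ∉ v :: fr := by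
                intro hh
                rcases List.mem_cons.1 hh with hh | hh
                · exact hwv hh
                · exact hwfr (List.mem_append_right _ hh)
              rw [h4 u, hInv.closed w hw hwfr' u hu]
              simp
      refine ih _ _ _ hInv' ?_
      have hbound : (ns ++ M).length ≤ N := by
        apply pvNodupBound hInv'.ndM
        intro w hw
        exact (hInv'.rcM w hw).1
      simp only [List.length_append, List.length_cons] at hbound hm ⊢
      omega

theorem pvFloodCorrect {N : Nat} {E : List (Int × Int)} (h : CutCtx N E)
    (adj : Nat → List Nat) (hadj : ∀ v, adj v = cutNbrs N E v) :
    ∀ v, (cutFlood adj (N + 1) [0] (pvUpd (fun _ => false) 0 true)) v = true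
      ↔ cutReach N E v := by
  have hInv0 : FloodInv N E [0] (pvUpd (fun _ => false) 0 true) [0] := by
    refine ⟨List.nodup_singleton 0, ?_, ?_, by simp, by simp, ?_⟩
    · intro v
      by_cases hv : v = 0
      · subst hv
        simp [pvUpd_same]
      · rw [pvUpd_other _ _ _ _ hv]
        simp [hv]
    · intro v hv
      have : v = 0 := by simpa using hv
      subst this
      exact pvReachZero h
    · intro v hv hvfr
      have : v = 0 := by simpa using hv
      subst this
      exact absurd (by simp) hvfr
  obtain ⟨M', hfin⟩ := pvFloodMain h adj hadj (N + 1) [0] (pvUpd (fun _ => false) 0 true)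
    [0] hInv0 (by have := h.hN; simp; omega)
  intro v
  rw [hfin.visiff v]
  constructor
  · exact hfin.rcM v
  · refine pvComplete h hfin.zeroM ?_ v
    intro w hw c hc
    have : (cutFlood adj (N + 1) [0] (pvUpd (fun _ => false) 0 true)) c = true :=
      hfin.closed w hw (by simp) c (pvChlSubNbrs hc)
    exact (hfin.visiff c).1 this

-- the filtered-sum loop computing total
theorem pvFoldlAddIf (l : List Nat) (p : Nat → Bool) (g : Nat → Int) (s : Int) :
    l.foldl (fun s v => if p v then s + g v else s) s
      = s + ((l.filter p).map g).sum := by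
  induction l generalizing s with
  | nil => simp
  | cons x t ih =>
    by_cases hx : p x
    · simp only [List.foldl_cons, hx, if_true, List.filter_cons, List.map_cons,
        List.sum_cons]
      rw [ih]
      ring
    · simp only [List.foldl_cons, hx, if_false, List.filter_cons]
      rw [ih]
      simp [hx]

-- ---------- B: the leaf-pruning loop ----------

def cutF (N : Nat) (E : List (Int × Int)) (dataF : Nat → Int) (c : Nat) : Int :=
  |2 * cutSval N E dataF c - cutSval N E dataF 0|

-- loop invariant: D = peeled vertices, Dc = child endpoints of the removed edges
-- (everything the loop touches stays in node 1's component)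
structure PeelInv (N : Nat) (E : List (Int × Int)) (dataF : Nat → Int)
    (st : List Nat) (adj : Nat → List Nat) (acc : Nat → Int) (best : Int)
    (D Dc : List Nat) : Prop where
  ndD : D.Nodup
  rcD : ∀ v ∈ D, cutReach N E v
  rcSt : ∀ v ∈ st, cutReach N E v
  ndAdj : ∀ v, cutReach N E v → (adj v).Nodup
  memAdj : ∀ v x, cutReach N E v → (x ∈ adj v ↔ (v ∉ D ∧ x ∈ cutNbrs N E v ∧ x ∉ D))
  accF : ∀ v, cutReach N E v → v ∉ D →
    acc v = dataF v + (((cutChl N E v).filter (fun c => decide (c ∈ D))).map (cutSval N E dataF)).sum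
      + (if v ≠ 0 ∧ cutParF N E v ∈ D then cutSval N E dataF 0 - cutSval N E dataF v else 0)
  stC : ∀ v, cutReach N E v → v ∉ D → (adj v).length = 1 → v ∈ st
  memDc : ∀ c, c ∈ Dc ↔ (cutReach N E c ∧ c ≠ 0 ∧ (c ∈ D ∨ cutParF N E c ∈ D))
  bestF : best = (Dc.map (cutF N E dataF)).foldl min ((N : Int) * 2000)

theorem pvPeelStep {N : Nat} {E : List (Int × Int)} {dataF : Nat → Int} (h : CutCtx N E)
    {st adj acc best D Dc} {v : Nat}
    (hInv : PeelInv N E dataF (v :: st) adj acc best D Dc)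
    (hlen : (adj v).length = 1) :
    PeelInv N E dataF
      (if ((pvUpd (pvUpd adj v []) ((adj v).headD 0)
          (((pvUpd adj v []) ((adj v).headD 0)).erase v)) ((adj v).headD 0)).length = 1
        then (adj v).headD 0 :: st else st)
      (pvUpd (pvUpd adj v []) ((adj v).headD 0)
        (((pvUpd adj v []) ((adj v).headD 0)).erase v))
      (pvUpd acc ((adj v).headD 0) (acc ((adj v).headD 0) + acc v))
      (min best |cutSval N E dataF 0 - 2 * acc v|)
      (v :: D)
      (Dc ++ [if (adj v).headD 0 = cutParF N E v then v else (adj v).headD 0]) := by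
  set u := (adj v).headD 0 with hu
  have hrv : cutReach N E v := hInv.rcSt v (by simp)
  have hAdjv : adj v = [u] := pvLenOne hlen
  have humem : u ∈ adj v := by rw [hAdjv]; simp
  obtain ⟨hvD, hunb, huD⟩ := (hInv.memAdj v u hrv).1 humem
  have hru : cutReach N E u := pvReachNbr h hrv hunb
  have huv : u ≠ v := by
    intro hh
    have := (h.adjdep v hrv.1 hrv.2 u hunb).2
    rw [hh] at this
    omega
  have honly : ∀ x, x ∈ cutNbrs N E v → x ∉ D → x = u := by
    intro x hx hxD
    have : x ∈ adj v := (hInv.memAdj v x hrv).2 ⟨hvD, hx, hxD⟩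
    rw [hAdjv] at this
    simpa using this
  -- case analysis: the surviving neighbour is v's parent or a child of v
  have hmain : (v ≠ 0 ∧ u = cutParF N E v ∧ acc v = cutSval N E dataF v ∧
        u ∉ cutChl N E v ∧ v ∈ cutChl N E u) ∨
      (u ∈ cutChl N E v ∧ u ≠ 0 ∧ cutParF N E u = v ∧
        acc v = cutSval N E dataF 0 - cutSval N E dataF u ∧
        (v ≠ 0 → cutParF N E v ∈ D) ∧ v ∉ cutChl N E u) := by
    rcases pvNbrCases h hrv hunb with ⟨hv0, hupar⟩ | huchl
    · left
      have hnotchl : u ∉ cutChl N E v := hupar ▸ pvParNotChl h hrv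
      have hchD : ∀ c ∈ cutChl N E v, c ∈ D := by
        intro c hc
        by_contra hcD
        exact hnotchl ((honly c (pvChlSubNbrs hc) hcD) ▸ hc)
      have hvchl : v ∈ cutChl N E u :=
        (pvChildIff h hru).2 ⟨hrv, hv0, hupar.symm⟩
      have hacc : acc v = cutSval N E dataF v := by
        have hflt : (cutChl N E v).filter (fun c => decide (c ∈ D)) = cutChl N E v := by
          apply List.filter_eq_self.2
          intro c hc
          simp [hchD c hc]
        have hparD : cutParF N E v ∉ D := hupar ▸ huD
        have hfv := hInv.accF v hrv hvD
        rw [hflt, if_neg (by tauto)] at hfv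
        rw [hfv, pvSRec h dataF hrv]
        ring
      exact ⟨hv0, hupar, hacc, hnotchl, hvchl⟩
    · right
      obtain ⟨_, hu0, hpu⟩ := (pvChildIff h hrv).1 huchl
      have hvnotchl : v ∉ cutChl N E u := by
        intro hvc
        have h1 := pvChlDepth huchl
        have h2 := pvChlDepth hvc
        omega
      have hothers : ∀ c ∈ cutChl N E v, c ∉ D → c = u := fun c hc =>
        honly c (pvChlSubNbrs hc)
      have hsum : (((cutChl N E v).filter (fun c => decide (c ∈ D))).map (cutSval N E dataF)).sum
          = ((cutChl N E v).map (cutSval N E dataF)).sum - cutSval N E dataF u :=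
        pvSumFilterAllButOne (pvNodupChl N E v) huchl huD hothers (cutSval N E dataF)
      by_cases hv0 : v = 0
      · subst hv0
        have hacc : acc 0 = cutSval N E dataF 0 - cutSval N E dataF u := by
          have hfv := hInv.accF 0 hrv hvD
          rw [hsum, if_neg (by tauto)] at hfv
          rw [hfv, pvSRec h dataF hrv]
          ring
        exact ⟨huchl, hu0, hpu, hacc, fun hh => absurd rfl hh, hvnotchl⟩
      · have hparD : cutParF N E v ∈ D := by
          by_contra hpD
          have heq := honly (cutParF N E v) (pvParSpec h hrv hv0).1 hpD
          have h1 := pvChlDepth huchl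
          have h2 := (pvParSpec h hrv hv0).2.1
          rw [heq] at h2
          omega
        have hacc : acc v = cutSval N E dataF 0 - cutSval N E dataF u := by
          have hfv := hInv.accF v hrv hvD
          rw [hsum, if_pos ⟨hv0, hparD⟩] at hfv
          rw [hfv, pvSRec h dataF hrv]
          ring
        exact ⟨huchl, hu0, hpu, hacc, fun _ => hparD, hvnotchl⟩
  set adj2 := pvUpd (pvUpd adj v []) u (((pvUpd adj v []) u).erase v) with hadj2
  have hadj2v : adj2 v = [] := by
    rw [hadj2, pvUpd_other _ _ _ _ (fun hh => huv hh.symm), pvUpd_same]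
  have hadj2u : adj2 u = (adj u).erase v := by
    rw [hadj2, pvUpd_same, pvUpd_other _ _ _ _ huv]
  have hadj2w : ∀ w, w ≠ v → w ≠ u → adj2 w = adj w := by
    intro w h1 h2
    rw [hadj2, pvUpd_other _ _ _ _ h2, pvUpd_other _ _ _ _ h1]
  set ce := if u = cutParF N E v then v else u with hce
  have hcand : |cutSval N E dataF 0 - 2 * acc v| = cutF N E dataF ce := by
    rcases hmain with ⟨_, hupar, hacc, _, _⟩ | ⟨huchl, _, _, hacc, _, _⟩
    · rw [hce, if_pos hupar, hacc, cutF, abs_sub_comm]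
    · have hne : u ≠ cutParF N E v := by
        intro hh
        exact (hh ▸ pvParNotChl h hrv) huchl
      rw [hce, if_neg hne, hacc, cutF]
      congr 1
      ring
  refine ⟨?_, ?_, ?_, ?_, ?_, ?_, ?_, ?_, ?_⟩
  · exact List.nodup_cons.2 ⟨hvD, hInv.ndD⟩
  · intro w hw
    rcases List.mem_cons.1 hw with rfl | hw
    · exact hrv
    · exact hInv.rcD w hw
  · intro w hw
    split at hw
    · rcases List.mem_cons.1 hw with rfl | hw
      · exact hru
      · exact hInv.rcSt w (by simp [hw])
    · exact hInv.rcSt w (by simp [hw])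
  · intro w hrw
    by_cases h1 : w = v
    · subst h1; rw [hadj2v]; exact List.nodup_nil
    · by_cases h2 : w = u
      · subst h2; rw [hadj2u]; exact (hInv.ndAdj u hru).erase v
      · rw [hadj2w w h1 h2]; exact hInv.ndAdj w hrw
  · intro w x hrw
    by_cases h1 : w = v
    · subst h1
      rw [hadj2v]
      simp only [List.not_mem_nil, false_iff]
      rintro ⟨hwD, _, _⟩
      exact hwD (by simp)
    · by_cases h2 : w = u
      · subst h2
        rw [hadj2u, (hInv.ndAdj u hru).mem_erase_iff]
        constructor
        · rintro ⟨hxv, hmem⟩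
          obtain ⟨a2, a3, a4⟩ := (hInv.memAdj u x hru).1 hmem
          exact ⟨by simp [huv, a2], a3, by simp [hxv, a4]⟩
        · rintro ⟨a2, a3, a4⟩
          have hxv : x ≠ v := fun hh => a4 (by simp [hh])
          exact ⟨hxv, (hInv.memAdj u x hru).2
            ⟨fun hh => a2 (by simp [hh]), a3, fun hh => a4 (by simp [hh])⟩⟩
      · rw [hadj2w w h1 h2]
        constructor
        · intro hmem
          obtain ⟨a2, a3, a4⟩ := (hInv.memAdj w x hrw).1 hmem
          have hxv : x ≠ v := fun hh =>
            h2 (honly w (pvNbrsSymm (hh ▸ a3)) a2)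
          exact ⟨by simp [h1, a2], a3, by simp [hxv, a4]⟩
        · rintro ⟨a2, a3, a4⟩
          exact (hInv.memAdj w x hrw).2
            ⟨fun hh => a2 (by simp [hh]), a3, fun hh => a4 (by simp [hh])⟩
  · intro w hrw hwD'
    have hwv : w ≠ v := fun hh => hwD' (by simp [hh])
    have hwD : w ∉ D := fun hh => hwD' (by simp [hh])
    by_cases h2 : w = u
    · subst h2
      rw [pvUpd_same]
      rcases hmain with ⟨hv0, hupar, haccv, _, hvchl⟩ | ⟨huchl, hu0, hpu, haccv, _, hvnotchl⟩
      · -- v was a child of u: its finished subtree sum joins u's dead children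
        have hins := pvSumFilterInsert (pvNodupChl N E u) hvchl hvD (cutSval N E dataF)
        have hpar_eq : (u ≠ 0 ∧ cutParF N E u ∈ v :: D) ↔ (u ≠ 0 ∧ cutParF N E u ∈ D) := by
          constructor
          · rintro ⟨a, b⟩
            rcases List.mem_cons.1 b with hh | hh
            · exfalso
              by_cases hu0 : u = 0
              · rw [hu0, pvParRoot h] at hh
                exact hv0 hh.symm
              · have hd1 := (pvParSpec h hru hu0).2.1
                have hd2 := pvChlDepth hvchl
                rw [hh] at hd1
                omega
            · exact ⟨a, hh⟩
          · rintro ⟨a, b⟩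
            exact ⟨a, by simp [b]⟩
        rw [hInv.accF u hru hwD, haccv, hins]
        by_cases hcnd : u ≠ 0 ∧ cutParF N E u ∈ D
        · rw [if_pos (hpar_eq.2 hcnd), if_pos hcnd]
          ring
        · rw [if_neg (fun hh => hcnd (hpar_eq.1 hh)), if_neg hcnd]
          ring
      · -- v was u's parent: u's complement term switches on
        have hirr : (cutChl N E u).filter (fun c => decide (c ∈ v :: D))
            = (cutChl N E u).filter (fun c => decide (c ∈ D)) := pvFilterIrrel _ hvnotchl
        rw [hInv.accF u hru hwD, haccv, hirr]
        rw [if_neg (by rw [hpu]; exact fun hh => hvD hh.2),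
          if_pos (by rw [hpu]; exact ⟨hu0, by simp⟩)]
        ring
    · rw [pvUpd_other _ _ _ _ h2]
      have hvnotchlw : v ∉ cutChl N E w := by
        intro hvc
        have hwnb : w ∈ cutNbrs N E v := pvNbrsSymm (pvChlSubNbrs hvc)
        exact h2 (honly w hwnb hwD)
      have hirr : (cutChl N E w).filter (fun c => decide (c ∈ v :: D))
          = (cutChl N E w).filter (fun c => decide (c ∈ D)) := pvFilterIrrel _ hvnotchlw
      have hparw : ¬ (w ≠ 0 ∧ cutParF N E w = v) := by
        rintro ⟨hw0, hh⟩
        have hwchl : w ∈ cutChl N E v := (pvChildIff h hrv).2 ⟨hrw, hw0, hh⟩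
        exact h2 (honly w (pvChlSubNbrs hwchl) hwD)
      have hpar_eq : (w ≠ 0 ∧ cutParF N E w ∈ v :: D) ↔ (w ≠ 0 ∧ cutParF N E w ∈ D) := by
        constructor
        · rintro ⟨a, b⟩
          rcases List.mem_cons.1 b with hh | hh
          · exact absurd ⟨a, hh⟩ hparw
          · exact ⟨a, hh⟩
        · rintro ⟨a, b⟩
          exact ⟨a, by simp [b]⟩
      rw [hInv.accF w hrw hwD, hirr]
      by_cases hcnd : w ≠ 0 ∧ cutParF N E w ∈ D
      · rw [if_pos (hpar_eq.2 hcnd), if_pos hcnd]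
      · rw [if_neg (fun hh => hcnd (hpar_eq.1 hh)), if_neg hcnd]
  · intro w hrw hwD' hlenw
    have hwv : w ≠ v := fun hh => hwD' (by simp [hh])
    have hwD : w ∉ D := fun hh => hwD' (by simp [hh])
    by_cases h2 : w = u
    · subst h2
      rw [if_pos hlenw]
      simp
    · have hsame : adj2 w = adj w := hadj2w w hwv h2
      have hw_old : w ∈ v :: st := hInv.stC w hrw hwD (by rw [← hsame]; exact hlenw)
      have hwst : w ∈ st := by
        rcases List.mem_cons.1 hw_old with hh | hh
        · exact absurd hh hwv
        · exact hh
      split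
      · exact List.mem_cons.2 (Or.inr hwst)
      · exact hwst
  · intro c
    rw [List.mem_append]
    constructor
    · rintro (hc | hc)
      · obtain ⟨a1, a2, a3⟩ := (hInv.memDc c).1 hc
        refine ⟨a1, a2, ?_⟩
        rcases a3 with hh | hh
        · exact Or.inl (by simp [hh])
        · exact Or.inr (by simp [hh])
      · have hcce : c = ce := by simpa [hce] using hc
        subst hcce
        rcases hmain with ⟨hv0, hupar, _, _, _⟩ | ⟨huchl, hu0, hpu, _, _, _⟩
        · rw [hce, if_pos hupar]
          exact ⟨hrv, hv0, Or.inl (by simp)⟩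
        · have hne : u ≠ cutParF N E v := by
            intro hh
            exact (hh ▸ pvParNotChl h hrv) huchl
          rw [hce, if_neg hne]
          exact ⟨hru, hu0, Or.inr (by rw [hpu]; simp)⟩
    · rintro ⟨a1, a2, a3⟩
      rcases a3 with hc | hc
      · rcases List.mem_cons.1 hc with rfl | hcD
        · -- c = v itself died
          rcases hmain with ⟨_, hupar, _, _, _⟩ | ⟨_, _, _, _, hparD, _⟩
          · exact Or.inr (by simp [hce, if_pos hupar])
          · exact Or.inl ((hInv.memDc c).2 ⟨a1, a2, Or.inr (hparD a2)⟩)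
        · exact Or.inl ((hInv.memDc c).2 ⟨a1, a2, Or.inl hcD⟩)
      · rcases List.mem_cons.1 hc with hcv | hcD
        · -- parent of c is v: c is a child of v, so dead or equal to u
          have hcchl : c ∈ cutChl N E v := (pvChildIff h hrv).2 ⟨a1, a2, hcv⟩
          by_cases hcD2 : c ∈ D
          · exact Or.inl ((hInv.memDc c).2 ⟨a1, a2, Or.inl hcD2⟩)
          · have hcu : c = u := honly c (pvChlSubNbrs hcchl) hcD2
            have hne : u ≠ cutParF N E v := by
              intro hh
              exact (hh ▸ pvParNotChl h hrv) (hcu ▸ hcchl)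
            exact Or.inr (by simp [hce, if_neg hne, hcu])
        · exact Or.inl ((hInv.memDc c).2 ⟨a1, a2, Or.inr hcD⟩)
  · rw [hInv.bestF, hcand, List.map_append, List.foldl_append]
    simp

theorem pvPeelMain {N : Nat} {E : List (Int × Int)} {dataF : Nat → Int} (h : CutCtx N E) :
    ∀ fuel st adj acc best D Dc, PeelInv N E dataF st adj acc best D Dc →
      st.length + (N - D.length) < fuel →
      ∃ adj' acc' D' Dc', PeelInv N E dataF [] adj' acc'
        (cutPeel (cutSval N E dataF 0) fuel st adj acc best) D' Dc' := by
  intro fuel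
  induction fuel with
  | zero => intro st adj acc best D Dc _ hm; exact absurd hm (by omega)
  | succ fuel ih =>
    intro st adj acc best D Dc hInv hm
    match st with
    | [] => exact ⟨adj, acc, D, Dc, hInv⟩
    | v :: st =>
      have hstep : cutPeel (cutSval N E dataF 0) (fuel + 1) (v :: st) adj acc best
          = if (adj v).length ≠ 1 then cutPeel (cutSval N E dataF 0) fuel st adj acc best
            else
              cutPeel (cutSval N E dataF 0) fuel
                (if ((pvUpd (pvUpd adj v []) ((adj v).headD 0)
                    (((pvUpd adj v []) ((adj v).headD 0)).erase v)) ((adj v).headD 0)).length = 1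
                  then (adj v).headD 0 :: st else st)
                (pvUpd (pvUpd adj v []) ((adj v).headD 0)
                  (((pvUpd adj v []) ((adj v).headD 0)).erase v))
                (pvUpd acc ((adj v).headD 0) (acc ((adj v).headD 0) + acc v))
                (min best |cutSval N E dataF 0 - 2 * acc v|) := rfl
      rw [hstep]
      by_cases hg : (adj v).length ≠ 1
      · rw [if_pos hg]
        refine ih st adj acc best D Dc ⟨hInv.ndD, hInv.rcD,
          fun w hw => hInv.rcSt w (by simp [hw]), hInv.ndAdj, hInv.memAdj, hInv.accF,
          ?_, hInv.memDc, hInv.bestF⟩ ?_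
        · intro w hrw hwD hlenw
          rcases List.mem_cons.1 (hInv.stC w hrw hwD hlenw) with rfl | hh
          · exact absurd hlenw hg
          · exact hh
        · simp only [List.length_cons] at hm
          omega
      · rw [if_neg hg]
        have hlen : (adj v).length = 1 := by omega
        have hInv' := pvPeelStep h hInv hlen
        refine ih _ _ _ _ (v :: D) _ hInv' ?_
        have hrv : cutReach N E v := hInv.rcSt v (by simp)
        have hvD : v ∉ D := by
          by_contra hvD
          have hnil : adj v = [] := by
            apply List.eq_nil_iff_forall_not_mem.2
            intro x hx
            exact ((hInv.memAdj v x hrv).1 hx).1 hvD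
          rw [hnil] at hlen
          simp at hlen
        have hDlt : D.length + 1 ≤ N := by
          have hnd : (v :: D).Nodup := List.nodup_cons.2 ⟨hvD, hInv.ndD⟩
          have hb := pvNodupBound hnd (by
            intro w hw
            rcases List.mem_cons.1 hw with rfl | hw
            · exact hrv.1
            · exact (hInv.rcD w hw).1)
          simpa using hb
        simp only [List.length_cons] at hm
        split <;> simp only [List.length_cons] <;> omega

-- at loop end every tree edge of node 1's component has a dead endpoint
theorem pvPeelNoEdge {N : Nat} {E : List (Int × Int)} {dataF : Nat → Int}
    {adj : Nat → List Nat} {acc : Nat → Int} {best : Int} {D Dc : List Nat}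
    (h : CutCtx N E) (hInv : PeelInv N E dataF [] adj acc best D Dc) :
    ∀ k c, cutReach N E c → c ≠ 0 → N ≤ cutDepthN N E c + k → (c ∈ D ∨ cutParF N E c ∈ D) := by
  intro k
  induction k with
  | zero =>
    intro c hc _ hk
    exact absurd hk (by have := hc.2; omega)
  | succ k ih =>
    intro c hrc hc0 hk
    by_contra hcon
    push_neg at hcon
    obtain ⟨hcD, hpD⟩ := hcon
    by_cases hch : ∃ x ∈ cutChl N E c, x ∉ D
    · obtain ⟨x, hx, hxD⟩ := hch
      obtain ⟨hrx, hx0, hpx⟩ := (pvChildIff h hrc).1 hx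
      have hdep := pvChlDepth hx
      rcases ih x hrx hx0 (by omega) with hh | hh
      · exact hxD hh
      · rw [hpx] at hh
        exact hcD hh
    · push_neg at hch
      have hP := (pvParSpec h hrc hc0).1
      have hPmem : cutParF N E c ∈ adj c :=
        (hInv.memAdj c _ hrc).2 ⟨hcD, hP, hpD⟩
      have hall : ∀ x ∈ adj c, x = cutParF N E c := by
        intro x hx
        obtain ⟨_, hxnb, hxD⟩ := (hInv.memAdj c x hrc).1 hx
        rcases pvNbrCases h hrc hxnb with ⟨_, hh⟩ | hh
        · exact hh
        · exact absurd (hch x hh) hxD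
      have hlen : (adj c).length = 1 := pvNodupAllEq (hInv.ndAdj c hrc) hPmem hall
      exact absurd (hInv.stC c hrc hcD hlen) (by simp)

-- ===== VERDICT (by name: the statement is the Claim_ definition above) =====
theorem cut_the_tree_spec : Claim_equal_cut_the_tree := by
  intro data edges _ hpre
  unfold Spec_cut_the_tree
  have h := pvCtxOfPre hpre
  obtain ⟨hordA, hchA⟩ := pvBfsFinal (N := data.length) (E := edges) h
  set rA := cutBfs (data.length + 2 * edges.length + 2) [0]
    (cutChildren data.length edges) [] with hrA
  set dataF : Nat → Int := fun i => data.getD i 0 with hdataF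
  have hsubA := (pvFoldACorrect h dataF hordA rA.2 hchA (0 :: rA.1) [] (by simp)
    (fun _ => 0)).1
  set subA := ((0 :: rA.1).reverse).foldl
    (fun sub n => pvUpd sub n (dataF n + (rA.2 n).foldl (fun s c => s + sub c) 0))
    (fun _ => 0) with hsubAdef
  have htotA : subA 0 = cutSval data.length edges dataF 0 := hsubA 0 (by simp)
  set F := cutF data.length edges dataF with hFdef
  set LA := ((0 :: rA.1).reverse).flatMap rA.2 with hLA
  -- A's result is the min of F over the flattened child lists
  have hAval : cut_the_tree data edges
      = (LA.map F).foldl min ((data.length : Int) * 2000) := by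
    have hA : cut_the_tree data edges
        = ((0 :: rA.1).reverse).foldl (fun best n => (rA.2 n).foldl (fun best c =>
            let ta := subA c
            let tb := subA 0 - ta
            let dif := |ta - tb|
            if dif < best then dif else best) best) ((data.length : Int) * 2000) := rfl
    rw [hA]
    have hstepA : ((0 :: rA.1).reverse).foldl (fun best n => (rA.2 n).foldl (fun best c =>
            let ta := subA c
            let tb := subA 0 - ta
            let dif := |ta - tb|
            if dif < best then dif else best) best) ((data.length : Int) * 2000)
        = ((0 :: rA.1).reverse).foldl
            (fun best n => (rA.2 n).foldl (fun best c => min best (F c)) best)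
            ((data.length : Int) * 2000) := by
      apply pvFoldlCongrMem
      intro b n hn
      rw [List.mem_reverse] at hn
      apply pvFoldlCongrMem
      intro b' c hc
      have hcc : c ∈ cutChl data.length edges n := (hchA n hn).mem_iff.1 hc
      have hcL : c ∈ (0 :: rA.1) := (pvChildPos h hordA hn hcc).1
      show (if |subA c - (subA 0 - subA c)| < b' then |subA c - (subA 0 - subA c)| else b')
        = min b' (F c)
      rw [pvMinIf, hsubA c hcL, htotA, hFdef]
      unfold cutF
      congr 1
      ring
    rw [hstepA, ← pvFoldlFlatMap ((0 :: rA.1).reverse) rA.2 (fun b c => min b (F c)),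
      ← hLA, List.foldl_map]
  -- F-values reachable on A's side
  have hmemLA : ∀ c, c ∈ LA ↔ (cutReach data.length edges c ∧ c ≠ 0) := by
    intro c
    rw [hLA, List.mem_flatMap]
    constructor
    · rintro ⟨v, hv, hcv⟩
      rw [List.mem_reverse] at hv
      have hrv := (hordA.mem v).1 hv
      have hcc : c ∈ cutChl data.length edges v := (hchA v hv).mem_iff.1 hcv
      obtain ⟨hrc, hc0, _⟩ := (pvChildIff h hrv).1 hcc
      exact ⟨hrc, hc0⟩
    · rintro ⟨hrc, hc0⟩
      have hrp := pvReachPar h hrc hc0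
      have hpL : cutParF data.length edges c ∈ (0 :: rA.1) := (hordA.mem _).2 hrp
      refine ⟨cutParF data.length edges c, List.mem_reverse.2 hpL, ?_⟩
      exact (hchA _ hpL).mem_iff.2 ((pvChildIff h hrp).2 ⟨hrc, hc0, rfl⟩)
  -- B's side: flood fill, total, then the peeling loop
  set adj0 := cutAdjB data.length edges with hadj0
  have hadjnb : ∀ v, adj0 v = cutNbrs data.length edges v := fun v =>
    pvChildrenEqNbrs data.length edges v
  set comp0 := cutFlood adj0 (data.length + 1) [0] (pvUpd (fun _ => false) 0 true)
    with hcomp0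
  have hcomp : ∀ v, comp0 v = true ↔ cutReach data.length edges v :=
    pvFloodCorrect h adj0 hadjnb
  set st0 := ((List.range data.length).filter
    (fun v => comp0 v && ((adj0 v).length == 1))).reverse with hst0
  have htotal : (List.range data.length).foldl
      (fun s v => if comp0 v then s + dataF v else s) 0
      = cutSval data.length edges dataF 0 := by
    rw [pvFoldlAddIf]
    have hperm : ((List.range data.length).filter comp0).Perm (0 :: rA.1) := by
      apply List.perm_of_nodup_nodup_toFinset_eq (List.nodup_range.filter _) hordA.nd
      ext v
      simp only [List.mem_toFinset, List.mem_filter, List.mem_range, hordA.mem]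
      constructor
      · rintro ⟨_, hv⟩
        exact (hcomp v).1 hv
      · intro hv
        exact ⟨hv.1, (hcomp v).2 hv⟩
    rw [(hperm.map dataF).sum_eq, pvSumRoot h dataF hordA]
    simp
  have hInv0 : PeelInv data.length edges dataF st0 adj0 dataF
      ((data.length : Int) * 2000) [] [] := by
    refine ⟨List.nodup_nil, by simp, ?_, ?_, ?_, ?_, ?_, by simp, rfl⟩
    · intro v hv
      rw [hst0, List.mem_reverse, List.mem_filter] at hv
      have := Bool.and_eq_true_iff.1 hv.2
      exact (hcomp v).1 this.1
    · intro v _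
      rw [hadjnb v]
      exact pvNodupNbrs data.length edges v
    · intro v x _
      rw [hadjnb v]
      constructor
      · intro hx
        exact ⟨by simp, hx, by simp⟩
      · rintro ⟨_, hx, _⟩
        exact hx
    · intro v _ _
      simp
    · intro v hrv _ hlen
      rw [hst0, List.mem_reverse, List.mem_filter, List.mem_range]
      exact ⟨hrv.1, by simp [(hcomp v).2 hrv, hlen]⟩
  have hmeas : st0.length + (data.length - ([] : List Nat).length) < 2 * data.length + 2 := by
    have h1 : st0.length ≤ data.length := by
      rw [hst0, List.length_reverse]
      calc ((List.range data.length).filter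
            (fun v => comp0 v && ((adj0 v).length == 1))).length
          ≤ (List.range data.length).length := List.length_filter_le _ _
        _ = data.length := List.length_range
    simp only [List.length_nil]
    omega
  obtain ⟨adj', acc', D', Dc', hfin⟩ := pvPeelMain h (2 * data.length + 2) st0 adj0 dataF
    ((data.length : Int) * 2000) [] [] hInv0 hmeas
  have hBval : cut_the_tree_alt data edges
      = (Dc'.map F).foldl min ((data.length : Int) * 2000) := by
    have hBstep : cut_the_tree_alt data edges
        = cutPeel (cutSval data.length edges dataF 0) (2 * data.length + 2) st0 adj0 dataF
          ((data.length : Int) * 2000) := by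
      show cutPeel ((List.range data.length).foldl
          (fun s v => if comp0 v then s + dataF v else s) 0)
          (2 * data.length + 2) st0 adj0 dataF ((data.length : Int) * 2000) = _
      rw [htotal]
    rw [hBstep, hfin.bestF, hFdef]
  have hDc' : ∀ c, c ∈ Dc' ↔ (cutReach data.length edges c ∧ c ≠ 0) := by
    intro c
    rw [hfin.memDc c]
    constructor
    · rintro ⟨a, b, _⟩
      exact ⟨a, b⟩
    · rintro ⟨a, b⟩
      refine ⟨a, b, ?_⟩
      exact pvPeelNoEdge h hfin data.length c a b (by omega)
  rw [hAval, hBval]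
  apply pvFoldlMin_setEq
  intro x
  simp only [List.mem_map]
  constructor
  · rintro ⟨c, hc, rfl⟩
    exact ⟨c, (hDc' c).2 ((hmemLA c).1 hc), rfl⟩
  · rintro ⟨c, hc, rfl⟩
    exact ⟨c, (hmemLA c).2 ((hDc' c).1 hc), rfl⟩
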